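-- pv_equiv track=rewrite | github.com/Shivam-baghel/Python_Scaler | 3. Advance/55. Graph - 3/Homework/Q2. Poisonous Graph.py | poisonousGraph
-- ===== SOURCE A (Python) =====
-- from collections import deque
--
-- def poisonousGraph(vertice,edgeMat):
--     mod = 998244353
--     # get total no of edges
--     edges = len(edgeMat)
--
--     # create the adjanecy list
--     adj = [[] for _ in range(vertice+1)]
--     # fill up the adjanency list
--     for i in range(edges):
--         # ith edge : u[i] --- v[i]
--         a = edgeMat[i][0]
--         b = edgeMat[i][1]
--
--         adj[a].append(b)
--         # make the below line comment to make code work for directed graph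
--         adj[b].append(a)
--
--     # create a queue
--     queue = deque()
--     # create even and odd sets
--     evenSet = set()
--     oddSet = set()
--
--     # color list filled with 0
--         # 0 represents no color
--         # 1 represents green color or in this case odd
--         # 2 represents blue color or in this case even
--     color = [0]*(vertice+1)
--
--     for i in range(vertice+1):
--         if color[i] == 0:
--             color[i] = 1    # give any color 1 or 2
--             # push it into the queue and the respective set.
--             oddSet.add(i)
--             queue.append(i)
--
--             # perform operations untill queue becomes empty.
--             while len(queue)>0:
--                 u = queue.popleft()
--                 # iterate on u
--                 for j in range(len(adj[u])):
--                     v = adj[u][j]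
--                     # if color of v is not assigned
--                     if color[v] == 0:
--                         color[v] = 3-color[u]
--                         queue.append(v)
--                         if (3-color[u])% 2 == 0:
--                             evenSet.add(v)
--                         else:
--                             oddSet.add(v)
--                     elif color[v] == color[u]:
--                         return 0
--
--     # step 3 to calculate no of ways to make graph poisonous
--     # x represents even
--     x = len(evenSet)
--     # y represents odd
--     y = len(oddSet)
--     ans1 = ((2**x)+(2**y))%mod
--     for i in range(vertice):
--         ans = (ans1*ans1)%mod
--
--     return ans
-- ===== SOURCE B (Python) =====
-- def poisonousGraph(vertice, edgeMat):
--     mod = 998244353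
--     n = vertice + 1
--     # parity-weighted union-find over vertices 0..vertice, union by minimum root
--     parent = list(range(n))
--     parity = [0] * n          # parity of the link to the parent
--
--     def find(a):
--         p = 0
--         while parent[a] != a:
--             p = (p + parity[a]) % 2
--             a = parent[a]
--         return a, p
--
--     for e in edgeMat:
--         ra, pa = find(e[0])
--         rb, pb = find(e[1])
--         if ra == rb:
--             if pa == pb:
--                 # edge inside a component joining two same-parity vertices: odd cycle
--                 return 0
--         elif ra < rb:
--             parent[rb] = ra
--             parity[rb] = (pa + pb + 1) % 2
--         else:
--             parent[ra] = rb
--             parity[ra] = (pa + pb + 1) % 2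
--
--     # the root of every component is its minimum vertex; that vertex is on the odd side
--     x = 0
--     y = 0
--     for v in range(n):
--         r, p = find(v)
--         if p == 0:
--             y += 1
--         else:
--             x += 1
--     ans1 = ((2 ** x) + (2 ** y)) % mod
--     return (ans1 * ans1) % mod
-- ===== Notes on version B (the rewrite author's own statement) =====
-- stated objective: alternative
-- what changed: Replaces A's BFS 2-coloring over an explicitly built adjacency list (deque, odd/even vertex sets, dead squaring loop) by a parity-weighted union-find with union-by-minimum-root that processes the edge list directly: an odd cycle is detected as an edge joining two same-parity vertices of one component, and each vertex's side is its parity to its component's minimum-index root.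
-- outside the precondition, e.g. on poisonousGraph(0, [[0, 0]]): A returns 0, B returns 0
import Mathlib
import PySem

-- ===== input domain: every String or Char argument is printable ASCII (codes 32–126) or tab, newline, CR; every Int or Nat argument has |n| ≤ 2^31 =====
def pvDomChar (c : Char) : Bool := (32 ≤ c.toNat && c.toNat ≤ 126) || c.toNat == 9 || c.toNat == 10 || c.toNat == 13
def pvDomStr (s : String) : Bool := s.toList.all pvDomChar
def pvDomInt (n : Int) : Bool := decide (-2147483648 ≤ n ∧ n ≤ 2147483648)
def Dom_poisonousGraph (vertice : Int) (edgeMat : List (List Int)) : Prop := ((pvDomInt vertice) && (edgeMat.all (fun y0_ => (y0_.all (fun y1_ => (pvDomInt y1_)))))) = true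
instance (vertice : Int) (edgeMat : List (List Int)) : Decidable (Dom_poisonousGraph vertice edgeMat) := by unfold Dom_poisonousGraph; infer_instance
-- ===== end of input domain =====

-- B replaces A's BFS 2-coloring over an adjacency list by a parity-weighted union-find with
-- union-by-minimum-root, processed edge by edge; equivalence is proved on Pre_.

-- ===== PORT A =====
-- inner edge scan of A's BFS: for j in range(len(adj[u])): ... (none = `return 0`)
def pvScanA (u : Int) :
    List Int → List Int × List Int × List Int × List Int →
    Option (List Int × List Int × List Int × List Int)
  | [], st => some st
  | v :: rest, (color, q, ev, od) =>
    let cv := PySem.List.pyGetD color v 0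
    if cv = 0 then
      let c' := PySem.List.pySetD color v (3 - PySem.List.pyGetD color u 0)
      let q' := q ++ [v]
      if PySem.Int.mod (3 - PySem.List.pyGetD c' u 0) 2 = 0 then
        pvScanA u rest (c', q', PySem.Set.add ev v, od)
      else
        pvScanA u rest (c', q', ev, PySem.Set.add od v)
    else if cv = PySem.List.pyGetD color u 0 then none
    else pvScanA u rest (color, q, ev, od)

-- A's `while len(queue)>0` BFS loop (fuel only makes the recursion total; it never runs out under Pre_)
def pvBfsA (adj : List (List Int)) :
    Nat → List Int × List Int × List Int × List Int →
    Option (List Int × List Int × List Int × List Int)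
  | _, (color, [], ev, od) => some (color, [], ev, od)
  | 0, _ => none
  | Nat.succ fuel, (color, u :: q, ev, od) =>
    match pvScanA u (PySem.List.pyGetD adj u []) (color, q, ev, od) with
    | none => none
    | some st => pvBfsA adj fuel st

-- A's `for i in range(vertice+1): if color[i] == 0: ...` loop
def pvOuterA (adj : List (List Int)) (fuel : Nat) :
    List Int → List Int × List Int × List Int →
    Option (List Int × List Int × List Int)
  | [], st => some st
  | i :: rest, (color, ev, od) =>
    if PySem.List.pyGetD color i 0 = 0 then
      match pvBfsA adj fuel (PySem.List.pySetD color i 1, [i], ev, PySem.Set.add od i) with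
      | none => none
      | some (c', _, ev', od') => pvOuterA adj fuel rest (c', ev', od')
    else pvOuterA adj fuel rest (color, ev, od)

def poisonousGraph (vertice : Int) (edgeMat : List (List Int)) : Int :=
  let md : Int := 998244353
  let edges := PySem.List.len edgeMat
  let adj0 := (PySem.List.pyRange 0 (vertice + 1)).map (fun _ => ([] : List Int))
  let adj := (PySem.List.pyRange 0 edges).foldl (fun adj i =>
      let e := PySem.List.pyGetD edgeMat i []
      let a := PySem.List.pyGetD e 0 0
      let b := PySem.List.pyGetD e 1 0
      let adj1 := PySem.List.pySetD adj a (PySem.List.pyGetD adj a [] ++ [b])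
      PySem.List.pySetD adj1 b (PySem.List.pyGetD adj1 b [] ++ [a])) adj0
  let color0 := PySem.List.pyRepeat [(0 : Int)] (vertice + 1)
  let fuel := (vertice + 1).toNat + 1
  match pvOuterA adj fuel (PySem.List.pyRange 0 (vertice + 1)) (color0, [], []) with
  | none => 0
  | some (_, ev, od) =>
    let x := PySem.Set.len ev
    let y := PySem.Set.len od
    let ans1 := PySem.Int.mod (2 ^ x.toNat + 2 ^ y.toNat) md
    -- A's dead `for i in range(vertice)` loop (under Pre_ it runs at least once; `ans` starts unbound)
    (PySem.List.pyRange 0 vertice).foldl (fun _ _ => PySem.Int.mod (ans1 * ans1) md) 0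

-- ===== PORT B =====
-- B's `find`: walk parent links accumulating link parities (fuel is only a totality device;
-- under Pre_ parent links strictly decrease, so it never runs out)
def pvFindB (parent parity : List Int) : Nat → Int → Int → Int × Int
  | 0, a, p => (a, p)
  | Nat.succ fuel, a, p =>
    if PySem.List.pyGetD parent a 0 ≠ a then
      pvFindB parent parity fuel (PySem.List.pyGetD parent a 0)
        (PySem.Int.mod (p + PySem.List.pyGetD parity a 0) 2)
    else (a, p)

-- B's per-edge union step (none = `return 0`: odd cycle)
def pvStepB (fuel : Nat) (st : List Int × List Int) (e : List Int) :
    Option (List Int × List Int) :=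
  let fa := pvFindB st.1 st.2 fuel (PySem.List.pyGetD e 0 0) 0
  let fb := pvFindB st.1 st.2 fuel (PySem.List.pyGetD e 1 0) 0
  if fa.1 = fb.1 then
    if fa.2 = fb.2 then none else some st
  else if fa.1 < fb.1 then
    some (PySem.List.pySetD st.1 fb.1 fa.1,
          PySem.List.pySetD st.2 fb.1 (PySem.Int.mod (fa.2 + fb.2 + 1) 2))
  else
    some (PySem.List.pySetD st.1 fa.1 fb.1,
          PySem.List.pySetD st.2 fa.1 (PySem.Int.mod (fa.2 + fb.2 + 1) 2))

-- B's final counting loop: y = parity-0 (minimum-root side), x = parity-1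
def pvCountB (parent parity : List Int) (fuel : Nat) :
    List Int → Int × Int → Int × Int
  | [], st => st
  | v :: rest, (x, y) =>
    if (pvFindB parent parity fuel v 0).2 = 0 then pvCountB parent parity fuel rest (x, y + 1)
    else pvCountB parent parity fuel rest (x + 1, y)

def poisonousGraph_alt (vertice : Int) (edgeMat : List (List Int)) : Int :=
  let md : Int := 998244353
  let n := vertice + 1
  let par0 := PySem.List.pyRange 0 n
  let pr0 := PySem.List.pyRepeat [(0 : Int)] n
  let fuel := n.toNat + 2
  match edgeMat.foldl (fun o e => o.bind (fun st => pvStepB fuel st e)) (some (par0, pr0)) with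
  | none => 0
  | some (par, pr) =>
    let xy := pvCountB par pr fuel (PySem.List.pyRange 0 n) (0, 0)
    let ans1 := PySem.Int.mod (2 ^ xy.1.toNat + 2 ^ xy.2.toNat) md
    PySem.Int.mod (ans1 * ans1) md

-- ===== PRECONDITION & SPEC =====
-- Pre_ excludes inputs on which A raises: vertice ≤ 0 (the final loop never binds `ans` → NameError),
-- rows shorter than 2 (IndexError), and edge endpoints outside Python's index range for the
-- vertice+1 adjacency/color lists (IndexError).  The only excluded inputs on which A still returns
-- are vertice = 0 graphs whose every edge row is a self-loop at the single vertex 0 (A returns 0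
-- there before reaching the unbound `ans`; B returns 0 there too — see the cite in the claim).
def Pre_poisonousGraph (vertice : Int) (edgeMat : List (List Int)) : Prop :=
  1 ≤ vertice ∧
  ∀ e ∈ edgeMat, 2 ≤ e.length ∧
    (-(vertice + 1) ≤ PySem.List.pyGetD e 0 0 ∧ PySem.List.pyGetD e 0 0 ≤ vertice) ∧
    (-(vertice + 1) ≤ PySem.List.pyGetD e 1 0 ∧ PySem.List.pyGetD e 1 0 ≤ vertice)
instance (vertice : Int) (edgeMat : List (List Int)) : Decidable (Pre_poisonousGraph vertice edgeMat) := by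
  unfold Pre_poisonousGraph; infer_instance

def pvWitness_poisonousGraph : Int × List (List Int) := (3, [[0, 1], [1, 2], [-1, 0]])

def Spec_poisonousGraph (vertice : Int) (edgeMat : List (List Int)) (out : Int) : Prop := out = poisonousGraph_alt vertice edgeMat
instance (vertice : Int) (edgeMat : List (List Int)) (out : Int) : Decidable (Spec_poisonousGraph vertice edgeMat out) := by unfold Spec_poisonousGraph; infer_instance

-- ===== CLAIM (what is proved, stated in full; the proofs are below) =====
def Claim_equal_poisonousGraph : Prop := ∀ (vertice : Int) (edgeMat : List (List Int)), Dom_poisonousGraph vertice edgeMat → Pre_poisonousGraph vertice edgeMat → Spec_poisonousGraph vertice edgeMat (poisonousGraph vertice edgeMat)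

-- ===== LEMMAS AND PROOFS =====

-- ---------- index bridge lemmas ----------
theorem pv_idx_neg (n : Nat) (v : Int) (h1 : -(n:Int) ≤ v) (h2 : v < 0) :
    PySem.List.pyIdx? n v = PySem.List.pyIdx? n (v + n) := by
  unfold PySem.List.pyIdx?
  split_ifs <;> try omega
  · congr 1; omega

theorem pv_get_neg {α : Type} (xs : List α) (v : Int) (d : α)
    (h1 : -(xs.length:Int) ≤ v) (h2 : v < 0) :
    PySem.List.pyGetD xs v d = PySem.List.pyGetD xs (v + xs.length) d := by
  unfold PySem.List.pyGetD PySem.List.pyGet?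
  rw [pv_idx_neg _ _ h1 h2]

theorem pv_set_neg {α : Type} (xs : List α) (v : Int) (w : α)
    (h1 : -(xs.length:Int) ≤ v) (h2 : v < 0) :
    PySem.List.pySetD xs v w = PySem.List.pySetD xs (v + xs.length) w := by
  unfold PySem.List.pySetD PySem.List.pySet?
  rw [pv_idx_neg _ _ h1 h2]

theorem pv_get_canon (xs : List Int) (i : Int) (d : Int) (h0 : 0 ≤ i) (hi : i < xs.length) :
    PySem.List.pyGetD xs i d = xs[i.toNat]'(by omega) := by
  exact PySem.List.pyGetD_eq_getElem xs d h0 hi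

theorem pv_len_set {α : Type} (xs : List α) (i : Int) (v : α) :
    (PySem.List.pySetD xs i v).length = xs.length :=
  PySem.List.length_pySetD xs i v

theorem pv_get_set (xs : List Int) (i j v d : Int)
    (h0 : 0 ≤ i) (hi : i < xs.length) (h0j : 0 ≤ j) (hj : j < xs.length) :
    PySem.List.pyGetD (PySem.List.pySetD xs i v) j d = if j = i then v else PySem.List.pyGetD xs j d := by
  rw [PySem.List.pySetD_of_nonneg xs v h0]
  rw [pv_get_canon _ j d h0j (by simp; omega), pv_get_canon _ j d h0j hj]
  rcases eq_or_ne j i with h | h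
  · subst h; simp
  · rw [if_neg h, List.getElem_set_ne (by omega)]

theorem pv_count_set_zero (xs : List Int) (i : Int) (v : Int)
    (h0 : 0 ≤ i) (hi : i < xs.length) (hold : PySem.List.pyGetD xs i 0 = 0) (hv : v ≠ 0) :
    (PySem.List.pySetD xs i v).count 0 + 1 = xs.count 0 := by
  rw [PySem.List.pySetD_of_nonneg xs v h0]
  rw [pv_get_canon xs i 0 h0 hi] at hold
  rw [List.count_set (by omega)]
  simp [hold, hv]
  have : 1 ≤ xs.count 0 := by
    have : xs[i.toNat]'(by omega) ∈ xs := List.getElem_mem _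
    rw [hold] at this
    exact List.one_le_count_iff.mpr this
  omega

-- ---------- normalisation ----------
def pvNorm (n v : Int) : Int := if v < 0 then v + n else v

theorem pvNorm_canon (n v : Int) (h : PySem.Raise.InRange n.toNat v) (hn : 0 ≤ n) :
    0 ≤ pvNorm n v ∧ pvNorm n v < n := by
  obtain ⟨h1, h2⟩ := h
  unfold pvNorm; split_ifs <;> omega

theorem pvNorm_eq_self (n v : Int) (h : 0 ≤ v) : pvNorm n v = v := by
  unfold pvNorm; split_ifs <;> omega

theorem pv_get_norm {α : Type} (n : Int) (xs : List α) (v : Int) (d : α)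
    (hlen : (xs.length : Int) = n) (h : PySem.Raise.InRange n.toNat v) :
    PySem.List.pyGetD xs v d = PySem.List.pyGetD xs (pvNorm n v) d := by
  obtain ⟨h1, h2⟩ := h
  unfold pvNorm
  split_ifs with hv
  · rw [pv_get_neg xs v d (by omega) hv, hlen]
  · rfl

theorem pv_set_norm {α : Type} (n : Int) (xs : List α) (v : Int) (w : α)
    (hlen : (xs.length : Int) = n) (h : PySem.Raise.InRange n.toNat v) :
    PySem.List.pySetD xs v w = PySem.List.pySetD xs (pvNorm n v) w := by
  obtain ⟨h1, h2⟩ := h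
  unfold pvNorm
  split_ifs with hv
  · rw [pv_set_neg xs v w (by omega) hv, hlen]
  · rfl

-- ---------- walks with parity ----------
def pvAdjE (l : List (Int × Int)) (u v : Int) : Prop := (u, v) ∈ l ∨ (v, u) ∈ l

theorem pvAdjE_symm {l : List (Int × Int)} {u v : Int} (h : pvAdjE l u v) : pvAdjE l v u :=
  h.symm

inductive pvW (l : List (Int × Int)) : Int → Int → Bool → Prop
  | refl (v : Int) : pvW l v v false
  | step {u w v : Int} {p : Bool} : pvAdjE l u w → pvW l w v p → pvW l u v (!p)

theorem pvW_trans {l : List (Int × Int)} {u v w : Int} {p q : Bool}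
    (h1 : pvW l u v p) (h2 : pvW l v w q) : pvW l u w (p ^^ q) := by
  induction h1 with
  | refl => simpa using h2
  | step ha _ ih =>
    have := pvW.step ha (ih h2)
    simpa [Bool.xor_comm, Bool.not_xor] using this

theorem pvW_single {l : List (Int × Int)} {u v : Int} (h : pvAdjE l u v) : pvW l u v true :=
  pvW.step h (pvW.refl v)

theorem pvW_symm {l : List (Int × Int)} {u v : Int} {p : Bool}
    (h : pvW l u v p) : pvW l v u p := by
  induction h with
  | refl => exact pvW.refl _
  | step ha _ ih =>
    have := pvW_trans ih (pvW_single (pvAdjE_symm ha))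
    simpa [Bool.xor_comm, Bool.not_xor] using this

theorem pvW_mono {l₁ l₂ : List (Int × Int)} (hs : ∀ x ∈ l₁, x ∈ l₂) {u v : Int} {p : Bool}
    (h : pvW l₁ u v p) : pvW l₂ u v p := by
  induction h with
  | refl => exact pvW.refl _
  | step ha _ ih =>
    exact pvW.step (by rcases ha with h' | h'; exact Or.inl (hs _ h'); exact Or.inr (hs _ h')) ih

def pvBip (l : List (Int × Int)) : Prop := ∀ v p, pvW l v v p → p = false

theorem pvW_unique {l : List (Int × Int)} (hB : pvBip l) {u v : Int} {p q : Bool}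
    (h1 : pvW l u v p) (h2 : pvW l u v q) : p = q := by
  have := hB u (p ^^ q) (pvW_trans h1 (pvW_symm h2))
  cases p <;> cases q <;> simp_all

theorem pv_parity_of_proper {l : List (Int × Int)} (c : Int → Bool)
    (hc : ∀ u v, pvAdjE l u v → c u ≠ c v) {u v : Int} {p : Bool}
    (h : pvW l u v p) : (c u ^^ c v) = p := by
  induction h with
  | refl => simp
  | @step u' w' v' p' ha _ ih =>
    have h1 : (c u' ^^ c w') = true := by
      have := hc _ _ ha
      cases hu : c u' <;> cases hw : c w' <;> simp_all
    have h2 : (c u' ^^ c v') = ((c u' ^^ c w') ^^ (c w' ^^ c v')) := by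
      cases c u' <;> cases c w' <;> cases c v' <;> rfl
    rw [h2, h1, ih]; cases p' <;> rfl

theorem pvBip_of_proper {l : List (Int × Int)} (c : Int → Bool)
    (hc : ∀ u v, pvAdjE l u v → c u ≠ c v) : pvBip l := by
  intro v p h
  have := pv_parity_of_proper c hc h
  simpa using this.symm

theorem pvW_closed {l : List (Int × Int)} (S : Int → Prop)
    (hS : ∀ v u, S v → pvAdjE l v u → S u) {u v : Int} {p : Bool}
    (h : pvW l u v p) (hu : S u) : S v := by
  induction h with
  | refl => exact hu
  | step ha _ ih => exact ih (hS _ _ hu ha)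

theorem pv_min_eq {l : List (Int × Int)} {v m r : Int} {p s : Bool}
    (h1 : pvW l v m p) (hmin1 : ∀ u q, pvW l v u q → m ≤ u)
    (h2 : pvW l v r s) (hmin2 : ∀ u q, pvW l v u q → r ≤ u) : m = r :=
  le_antisymm (hmin1 r s h2) (hmin2 m p h1)

theorem pvW_can {l : List (Int × Int)} {n : Int}
    (hE : ∀ x ∈ l, (0 ≤ x.1 ∧ x.1 < n) ∧ (0 ≤ x.2 ∧ x.2 < n)) {u v : Int} {p : Bool}
    (h : pvW l u v p) : v = u ∨ (0 ≤ v ∧ v < n) := by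
  induction h with
  | refl => exact Or.inl rfl
  | @step u' w' v' p' ha hw ih =>
    right
    rcases ih with h' | h'
    · subst h'
      rcases ha with h' | h'
      · exact (hE _ h').2
      · exact (hE _ h').1
    · exact h'

-- ---------- the edge list seen abstractly ----------
def pvE0 (e : List Int) : Int := PySem.List.pyGetD e 0 0
def pvE1 (e : List Int) : Int := PySem.List.pyGetD e 1 0
def pvEV (n : Int) (em : List (List Int)) : List (Int × Int) :=
  em.map (fun e => (pvNorm n (pvE0 e), pvNorm n (pvE1 e)))

theorem pvEV_append (n : Int) (l1 l2 : List (List Int)) :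
    pvEV n (l1 ++ l2) = pvEV n l1 ++ pvEV n l2 := by
  unfold pvEV; simp

-- A's adjacency-building fold body
def pvAdjStep (adj : List (List Int)) (e : List Int) : List (List Int) :=
  let adj1 := PySem.List.pySetD adj (pvE0 e) (PySem.List.pyGetD adj (pvE0 e) [] ++ [pvE1 e])
  PySem.List.pySetD adj1 (pvE1 e) (PySem.List.pyGetD adj1 (pvE1 e) [] ++ [pvE0 e])

theorem pv_get_set' {α : Type} (xs : List α) (i j : Int) (v : α) (d : α)
    (h0 : 0 ≤ i) (hi : i < xs.length) (h0j : 0 ≤ j) (hj : j < xs.length) :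
    PySem.List.pyGetD (PySem.List.pySetD xs i v) j d = if j = i then v else PySem.List.pyGetD xs j d := by
  rw [PySem.List.pySetD_of_nonneg xs v h0]
  rw [PySem.List.pyGetD_eq_getElem _ d h0j (by simp; omega), PySem.List.pyGetD_eq_getElem _ d h0j hj]
  rcases eq_or_ne j i with h | h
  · subst h; simp
  · rw [if_neg h, List.getElem_set_ne (by omega)]

theorem pv_adjStep_len (n : Int) (adj : List (List Int)) (e : List Int)
    (hlen : (adj.length : Int) = n) : ((pvAdjStep adj e).length : Int) = n := by
  unfold pvAdjStep; simp [pv_len_set, hlen]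

theorem pv_adjStep_get (n : Int) (adj : List (List Int)) (e : List Int) (hn : 1 ≤ n)
    (hlen : (adj.length : Int) = n)
    (ha : PySem.Raise.InRange n.toNat (pvE0 e)) (hb : PySem.Raise.InRange n.toNat (pvE1 e))
    (u : Int) (h0 : 0 ≤ u) (hu : u < n) :
    PySem.List.pyGetD (pvAdjStep adj e) u [] =
      (PySem.List.pyGetD adj u [] ++ (if u = pvNorm n (pvE0 e) then [pvE1 e] else []))
        ++ (if u = pvNorm n (pvE1 e) then [pvE0 e] else []) := by
  have hnn : (0:Int) ≤ n := by omega
  obtain ⟨ha0, ha1⟩ := pvNorm_canon n (pvE0 e) ha hnn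
  obtain ⟨hb0, hb1⟩ := pvNorm_canon n (pvE1 e) hb hnn
  unfold pvAdjStep
  rw [pv_set_norm n adj _ _ hlen ha, pv_get_norm n adj _ _ hlen ha]
  have hlen1 : ((PySem.List.pySetD adj (pvNorm n (pvE0 e)) (PySem.List.pyGetD adj (pvNorm n (pvE0 e)) [] ++ [pvE1 e])).length : Int) = n := by
    simp [pv_len_set, hlen]
  rw [pv_set_norm n _ _ _ hlen1 hb, pv_get_norm n _ _ _ hlen1 hb]
  rw [pv_get_set' _ _ _ _ _ hb0 (by omega) h0 (by omega)]
  rw [pv_get_set' _ _ _ _ _ ha0 (by omega) hb0 (by omega)]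
  rw [pv_get_set' _ _ _ _ _ ha0 (by omega) h0 (by omega)]
  split_ifs with h1 h2 h3 <;> simp_all

theorem pv_adj_build (n : Int) (hn : 1 ≤ n) :
    ∀ (em done : List (List Int)) (adj : List (List Int)),
    (∀ e ∈ em, PySem.Raise.InRange n.toNat (pvE0 e) ∧ PySem.Raise.InRange n.toNat (pvE1 e)) →
    (adj.length : Int) = n →
    (∀ u, 0 ≤ u → u < n → ∀ w, w ∈ PySem.List.pyGetD adj u [] ↔
        ∃ e ∈ done, (pvNorm n (pvE0 e) = u ∧ pvE1 e = w) ∨ (pvNorm n (pvE1 e) = u ∧ pvE0 e = w)) →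
    ((em.foldl pvAdjStep adj).length : Int) = n ∧
    (∀ u, 0 ≤ u → u < n → ∀ w, w ∈ PySem.List.pyGetD (em.foldl pvAdjStep adj) u [] ↔
        ∃ e ∈ done ++ em, (pvNorm n (pvE0 e) = u ∧ pvE1 e = w) ∨ (pvNorm n (pvE1 e) = u ∧ pvE0 e = w)) := by
  intro em
  induction em with
  | nil => intro done adj _ hlen hinv; simpa using ⟨hlen, hinv⟩
  | cons e rest ih =>
    intro done adj hr hlen hinv
    obtain ⟨hea, heb⟩ := hr e (List.mem_cons_self ..)
    have hlen' := pv_adjStep_len n adj e hlen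
    have hinv' : ∀ u, 0 ≤ u → u < n → ∀ w, w ∈ PySem.List.pyGetD (pvAdjStep adj e) u [] ↔
        ∃ e' ∈ done ++ [e], (pvNorm n (pvE0 e') = u ∧ pvE1 e' = w) ∨ (pvNorm n (pvE1 e') = u ∧ pvE0 e' = w) := by
      intro u h0 hu w
      rw [pv_adjStep_get n adj e hn hlen hea heb u h0 hu]
      constructor
      · intro hw
        rcases List.mem_append.mp hw with hw | hw
        · rcases List.mem_append.mp hw with hw | hw
          · obtain ⟨e', he', hc⟩ := (hinv u h0 hu w).mp hw
            exact ⟨e', by simp [he'], hc⟩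
          · split_ifs at hw with hcond
            · simp at hw
              exact ⟨e, by simp, Or.inl ⟨hcond.symm, hw.symm⟩⟩
            · cases hw
        · split_ifs at hw with hcond
          · simp at hw
            exact ⟨e, by simp, Or.inr ⟨hcond.symm, hw.symm⟩⟩
          · cases hw
      · rintro ⟨e', he', hc⟩
        rcases List.mem_append.mp he' with he' | he'
        · exact List.mem_append_left _ (List.mem_append_left _ ((hinv u h0 hu w).mpr ⟨e', he', hc⟩))
        · simp at he'; subst he'
          rcases hc with ⟨h1, h2⟩ | ⟨h1, h2⟩
          · exact List.mem_append_left _ (List.mem_append_right _ (by rw [if_pos h1.symm]; simp [h2]))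
          · exact List.mem_append_right _ (by rw [if_pos h1.symm]; simp [h2])
    have := ih (done ++ [e]) (pvAdjStep adj e) (fun e' he' => hr e' (List.mem_cons_of_mem _ he')) hlen' hinv'
    simpa using this

-- ---------- A-side invariants ----------
def pvGet (xs : List Int) (v : Int) : Int := PySem.List.pyGetD xs v 0

structure PvACtx (n : Int) (E : List (Int × Int)) (adj : List (List Int)) : Prop where
  hn : 1 ≤ n
  hE : ∀ x ∈ E, (0 ≤ x.1 ∧ x.1 < n) ∧ (0 ≤ x.2 ∧ x.2 < n)
  hlen : (adj.length : Int) = n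
  mem1 : ∀ u, 0 ≤ u → u < n → ∀ w ∈ PySem.List.pyGetD adj u [],
           PySem.Raise.InRange n.toNat w ∧ pvAdjE E u (pvNorm n w)
  mem2 : ∀ u v, 0 ≤ u → u < n → pvAdjE E u v → ∃ w ∈ PySem.List.pyGetD adj u [], pvNorm n w = v

structure PvAInv (n : Int) (E : List (Int × Int)) (color ev od : List Int) : Prop where
  len : (color.length : Int) = n
  vals : ∀ v, 0 ≤ v → v < n → pvGet color v = 0 ∨ pvGet color v = 1 ∨ pvGet color v = 2
  canon : ∀ v, 0 ≤ v → v < n → pvGet color v ≠ 0 →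
    ∃ m p, pvW E v m p ∧ (∀ u q, pvW E v u q → m ≤ u) ∧ pvGet color v = (if p then 2 else 1)
  evR : ∀ w ∈ ev, PySem.Raise.InRange n.toNat w
  odR : ∀ w ∈ od, PySem.Raise.InRange n.toNat w
  evM : ∀ v, 0 ≤ v → v < n → ((∃ w ∈ ev, pvNorm n w = v) ↔ pvGet color v = 2)
  odM : ∀ v, 0 ≤ v → v < n → ((∃ w ∈ od, pvNorm n w = v) ↔ pvGet color v = 1)
  evN : (ev.map (pvNorm n)).Nodup
  odN : (od.map (pvNorm n)).Nodup

def pvQR (n : Int) (color q : List Int) : Prop :=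
  ∀ w ∈ q, PySem.Raise.InRange n.toNat w ∧ pvGet color (pvNorm n w) ≠ 0

def pvClosed (n : Int) (E : List (Int × Int)) (color q : List Int) : Prop :=
  ∀ v, 0 ≤ v → v < n → pvGet color v ≠ 0 → (∀ w ∈ q, pvNorm n w ≠ v) →
    ∀ u, pvAdjE E v u → pvGet color u ≠ 0 ∧ pvGet color u ≠ pvGet color v

theorem pv_adjE_can2 {n : Int} {E : List (Int × Int)}
    (hE : ∀ x ∈ E, (0 ≤ x.1 ∧ x.1 < n) ∧ (0 ≤ x.2 ∧ x.2 < n)) {u v : Int}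
    (h : pvAdjE E u v) : (0 ≤ u ∧ u < n) ∧ (0 ≤ v ∧ v < n) := by
  rcases h with h | h
  · exact hE _ h
  · exact ⟨(hE _ h).2, (hE _ h).1⟩

theorem pv_scanA_run (n : Int) (E : List (Int × Int)) (adj : List (List Int))
    (ctx : PvACtx n E adj) (u : Int) (hu : PySem.Raise.InRange n.toNat u) :
    ∀ (nbrs color q ev od : List Int),
    PvAInv n E color ev od →
    pvGet color (pvNorm n u) ≠ 0 →
    (∀ w ∈ nbrs, PySem.Raise.InRange n.toNat w ∧ pvAdjE E (pvNorm n u) (pvNorm n w)) →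
    (pvScanA u nbrs (color, q, ev, od) = none ∧ ¬ pvBip E) ∨
    (∃ color' enq ev' od',
      pvScanA u nbrs (color, q, ev, od) = some (color', q ++ enq, ev', od') ∧
      PvAInv n E color' ev' od' ∧
      (∀ v, 0 ≤ v → v < n → pvGet color v ≠ 0 → pvGet color' v = pvGet color v) ∧
      (∀ v, 0 ≤ v → v < n → pvGet color v = 0 → pvGet color' v ≠ 0 → ∃ w ∈ enq, pvNorm n w = v) ∧
      color'.count 0 + enq.length = color.count 0 ∧
      (∀ w ∈ enq, PySem.Raise.InRange n.toNat w ∧ pvGet color' (pvNorm n w) ≠ 0) ∧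
      (∀ w ∈ nbrs, pvGet color' (pvNorm n w) ≠ 0 ∧ pvGet color' (pvNorm n w) ≠ pvGet color (pvNorm n u))) := by
  have hnn : (0 : Int) ≤ n := by have := ctx.hn; omega
  obtain ⟨hu0, hu1⟩ := pvNorm_canon n u hu hnn
  intro nbrs
  induction nbrs with
  | nil =>
    intro color q ev od inv hcu _
    right
    exact ⟨color, [], ev, od, by simp [pvScanA], inv, fun v _ _ _ => rfl,
      fun v _ _ h0 hne => absurd h0 hne, by simp, by simp, by simp⟩
  | cons v rest ih =>
    intro color q ev od inv hcu hnb
    obtain ⟨hvR, hvadj⟩ := hnb v (List.mem_cons_self ..)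
    obtain ⟨hv0, hv1⟩ := pvNorm_canon n v hvR hnn
    have hrest := fun w hw => hnb w (List.mem_cons_of_mem _ hw)
    -- the raw reads are the canonical reads
    have hgv : PySem.List.pyGetD color v 0 = pvGet color (pvNorm n v) :=
      pv_get_norm n color v 0 inv.len hvR
    have hgu : PySem.List.pyGetD color u 0 = pvGet color (pvNorm n u) :=
      pv_get_norm n color u 0 inv.len hu
    by_cases h0 : pvGet color (pvNorm n v) = 0
    · -- uncoloured neighbour: colour it and enqueue it
      have hne : pvNorm n v ≠ pvNorm n u := by
        intro h; rw [h] at h0; exact hcu h0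
      have hcu12 : pvGet color (pvNorm n u) = 1 ∨ pvGet color (pvNorm n u) = 2 := by
        rcases inv.vals _ hu0 hu1 with h | h | h
        · exact absurd h hcu
        · exact Or.inl h
        · exact Or.inr h
      set cu := pvGet color (pvNorm n u) with hcud
      -- the updated colour list, canonically
      have hset : PySem.List.pySetD color v (3 - PySem.List.pyGetD color u 0)
          = PySem.List.pySetD color (pvNorm n v) (3 - cu) := by
        rw [hgu, pv_set_norm n color v _ inv.len hvR]
      set c' := PySem.List.pySetD color (pvNorm n v) (3 - cu) with hc'd
      have hlen' : (c'.length : Int) = n := by rw [hc'd, pv_len_set]; exact inv.len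
      have hget' : ∀ x, 0 ≤ x → x < n →
          pvGet c' x = if x = pvNorm n v then 3 - cu else pvGet color x := by
        intro x hx0 hx1
        exact pv_get_set color (pvNorm n v) x (3 - cu) 0 hv0 (by rw [inv.len]; omega) hx0 (by rw [inv.len]; omega)
      have hgvc' : pvGet c' (pvNorm n v) = 3 - cu := by rw [hget' _ hv0 hv1, if_pos rfl]
      have hguc' : pvGet c' (pvNorm n u) = cu := by rw [hget' _ hu0 hu1, if_neg (by exact fun h => hne h.symm)]
      have hmono' : ∀ x, 0 ≤ x → x < n → x ≠ pvNorm n v → pvGet c' x = pvGet color x := by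
        intro x hx0 hx1 hx
        rw [hget' x hx0 hx1, if_neg hx]
      have hgu' : PySem.List.pyGetD c' u 0 = cu := by
        rw [pv_get_norm n c' u 0 hlen' hu]; exact hguc'
      -- canonical colour of the new vertex
      obtain ⟨m, p, hw, hmin, hval⟩ := inv.canon _ hu0 hu1 hcu
      have hwv : pvW E (pvNorm n v) m (!p) := by
        have h1 : pvW E (pvNorm n v) (pvNorm n u) true := pvW_single (pvAdjE_symm hvadj)
        have := pvW_trans h1 hw
        simpa using this
      have hminv : ∀ x q', pvW E (pvNorm n v) x q' → m ≤ x := by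
        intro x q' hx
        have h1 : pvW E (pvNorm n u) (pvNorm n v) true := pvW_single hvadj
        exact hmin x _ (pvW_trans h1 hx)
      have hvalv : (3 : Int) - cu = if !p then 2 else 1 := by
        rw [← hcud] at hval
        cases p <;> simp_all <;> omega
      have hcanon' : ∀ x, 0 ≤ x → x < n → pvGet c' x ≠ 0 →
          ∃ m' p', pvW E x m' p' ∧ (∀ u' q', pvW E x u' q' → m' ≤ u') ∧ pvGet c' x = (if p' then 2 else 1) := by
        intro x hx0 hx1 hx
        rcases eq_or_ne x (pvNorm n v) with h | h
        · subst h
          exact ⟨m, !p, hwv, hminv, by rw [hgvc', hvalv]⟩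
        · rw [hmono' x hx0 hx1 h] at hx ⊢
          exact inv.canon x hx0 hx1 hx
      have hvals' : ∀ x, 0 ≤ x → x < n → pvGet c' x = 0 ∨ pvGet c' x = 1 ∨ pvGet c' x = 2 := by
        intro x hx0 hx1
        rcases eq_or_ne x (pvNorm n v) with h | h
        · subst h; rw [hgvc']; rcases hcu12 with h | h <;> rw [hcud] at h <;> omega
        · rw [hmono' x hx0 hx1 h]; exact inv.vals x hx0 hx1
      have hcount' : c'.count 0 + 1 = color.count 0 := by
        apply pv_count_set_zero color (pvNorm n v) (3 - cu) hv0 (by rw [inv.len]; omega) h0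
        rcases hcu12 with h | h <;> rw [hcud] at h <;> omega
      -- v is in neither set yet
      have hvnev : ∀ w ∈ ev, pvNorm n w ≠ pvNorm n v := by
        intro w hw h
        have : pvGet color (pvNorm n v) = 2 := (inv.evM _ hv0 hv1).mp ⟨w, hw, h⟩
        omega
      have hvnod : ∀ w ∈ od, pvNorm n w ≠ pvNorm n v := by
        intro w hw h
        have : pvGet color (pvNorm n v) = 1 := (inv.odM _ hv0 hv1).mp ⟨w, hw, h⟩
        omega
      have hvev : v ∉ ev := fun h => hvnev v h rfl
      have hvod : v ∉ od := fun h => hvnod v h rfl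
      have haddev : PySem.Set.add ev v = ev ++ [v] := by
        simp [PySem.Set.add, PySem.Set.contains, List.contains_eq_mem, hvev]
      have haddod : PySem.Set.add od v = od ++ [v] := by
        simp [PySem.Set.add, PySem.Set.contains, List.contains_eq_mem, hvod]
      -- case on u's colour to resolve the evenness test
      rcases hcu12 with hcu1 | hcu2
      · -- cu = 1: new colour 2, v joins the even set
        have htest : PySem.Int.mod (3 - PySem.List.pyGetD c' u 0) 2 = 0 := by
          rw [hgu', hcu1]; decide
        have hinv' : PvAInv n E c' (ev ++ [v]) od := by
          refine ⟨hlen', hvals', hcanon', ?_, inv.odR, ?_, ?_, ?_, inv.odN⟩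
          · intro w hw
            rcases List.mem_append.mp hw with hw | hw
            · exact inv.evR w hw
            · rw [List.mem_singleton.mp hw]; exact hvR
          · intro x hx0 hx1
            rcases eq_or_ne x (pvNorm n v) with h | h
            · subst h
              constructor
              · intro _; rw [hgvc', hcu1]; norm_num
              · intro _; exact ⟨v, by simp⟩
            · rw [hmono' x hx0 hx1 h]
              rw [← inv.evM x hx0 hx1]
              constructor
              · rintro ⟨w, hw, hwx⟩
                rcases List.mem_append.mp hw with hw | hw
                · exact ⟨w, hw, hwx⟩
                · rw [List.mem_singleton.mp hw] at hwx; exact absurd hwx.symm h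
              · rintro ⟨w, hw, hwx⟩; exact ⟨w, List.mem_append_left _ hw, hwx⟩
          · intro x hx0 hx1
            rcases eq_or_ne x (pvNorm n v) with h | h
            · subst h
              rw [hgvc', hcu1]
              constructor
              · rintro ⟨w, hw, hwx⟩
                exact absurd hwx (hvnod w hw)
              · intro h'; omega
            · rw [hmono' x hx0 hx1 h]; exact inv.odM x hx0 hx1
          · rw [List.map_append]
            simp only [List.map_cons, List.map_nil]
            apply List.Nodup.append inv.evN (List.nodup_singleton _)
            intro a ha hb
            simp only [List.mem_singleton] at hb
            obtain ⟨w, hw, hwa⟩ := List.mem_map.mp ha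
            exact hvnev w hw (hwa.trans hb)
        have hcuagain : pvGet c' (pvNorm n u) ≠ 0 := by rw [hguc', hcu1]; omega
        have := ih c' (q ++ [v]) (ev ++ [v]) od hinv' hcuagain hrest
        rcases this with ⟨hnone, hbip⟩ | ⟨color', enq, ev', od', hsome, inv'', hmono'', hnew'', hcount'', henq'', hdone''⟩
        · left
          constructor
          · simp only [pvScanA]
            rw [hgv, if_pos h0, hset, if_pos htest, haddev]
            exact hnone
          · exact hbip
        · right
          refine ⟨color', v :: enq, ev', od', ?_, inv'', ?_, ?_, ?_, ?_, ?_⟩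
          · simp only [pvScanA]
            rw [hgv, if_pos h0, hset, if_pos htest, haddev]
            rw [hsome]
            simp
          · intro x hx0 hx1 hx
            have hxne : x ≠ pvNorm n v := fun h => by rw [h] at hx; exact hx h0
            rw [hmono'' x hx0 hx1 (by rw [hmono' x hx0 hx1 hxne]; exact hx), hmono' x hx0 hx1 hxne]
          · intro x hx0 hx1 hx0' hxne
            rcases eq_or_ne x (pvNorm n v) with h | h
            · exact ⟨v, List.mem_cons_self .., h.symm⟩
            · have : pvGet c' x = 0 := by rw [hmono' x hx0 hx1 h]; exact hx0'
              obtain ⟨w, hw, hwx⟩ := hnew'' x hx0 hx1 this hxne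
              exact ⟨w, List.mem_cons_of_mem _ hw, hwx⟩
          · simp only [List.length_cons]
            omega
          · intro w hw
            rcases List.mem_cons.mp hw with hw | hw
            · subst hw
              refine ⟨hvR, ?_⟩
              rw [hmono'' _ hv0 hv1 (by rw [hgvc', hcu1]; omega), hgvc', hcu1]
              omega
            · exact henq'' w hw
          · intro w hw
            rcases List.mem_cons.mp hw with hw | hw
            · subst hw
              have h1 : pvGet color' (pvNorm n w) = 3 - cu := by
                rw [hmono'' _ hv0 hv1 (by rw [hgvc', hcu1]; omega), hgvc']
              rw [h1, hcu1]
              constructor <;> omega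
            · have := hdone'' w hw
              rw [hguc'] at this
              exact this
      · -- cu = 2: new colour 1, v joins the odd set
        have htest : ¬ PySem.Int.mod (3 - PySem.List.pyGetD c' u 0) 2 = 0 := by
          rw [hgu', hcu2]; decide
        have hinv' : PvAInv n E c' ev (od ++ [v]) := by
          refine ⟨hlen', hvals', hcanon', inv.evR, ?_, ?_, ?_, inv.evN, ?_⟩
          · intro w hw
            rcases List.mem_append.mp hw with hw | hw
            · exact inv.odR w hw
            · rw [List.mem_singleton.mp hw]; exact hvR
          · intro x hx0 hx1
            rcases eq_or_ne x (pvNorm n v) with h | h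
            · subst h
              rw [hgvc', hcu2]
              constructor
              · rintro ⟨w, hw, hwx⟩
                exact absurd hwx (hvnev w hw)
              · intro h'; omega
            · rw [hmono' x hx0 hx1 h]; exact inv.evM x hx0 hx1
          · intro x hx0 hx1
            rcases eq_or_ne x (pvNorm n v) with h | h
            · subst h
              constructor
              · intro _; rw [hgvc', hcu2]; norm_num
              · intro _; exact ⟨v, by simp⟩
            · rw [hmono' x hx0 hx1 h]
              rw [← inv.odM x hx0 hx1]
              constructor
              · rintro ⟨w, hw, hwx⟩
                rcases List.mem_append.mp hw with hw | hw
                · exact ⟨w, hw, hwx⟩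
                · rw [List.mem_singleton.mp hw] at hwx; exact absurd hwx.symm h
              · rintro ⟨w, hw, hwx⟩; exact ⟨w, List.mem_append_left _ hw, hwx⟩
          · rw [List.map_append]
            simp only [List.map_cons, List.map_nil]
            apply List.Nodup.append inv.odN (List.nodup_singleton _)
            intro a ha hb
            simp only [List.mem_singleton] at hb
            obtain ⟨w, hw, hwa⟩ := List.mem_map.mp ha
            exact hvnod w hw (hwa.trans hb)
        have hcuagain : pvGet c' (pvNorm n u) ≠ 0 := by rw [hguc', hcu2]; omega
        have := ih c' (q ++ [v]) ev (od ++ [v]) hinv' hcuagain hrest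
        rcases this with ⟨hnone, hbip⟩ | ⟨color', enq, ev', od', hsome, inv'', hmono'', hnew'', hcount'', henq'', hdone''⟩
        · left
          constructor
          · simp only [pvScanA]
            rw [hgv, if_pos h0, hset, if_neg htest, haddod]
            exact hnone
          · exact hbip
        · right
          refine ⟨color', v :: enq, ev', od', ?_, inv'', ?_, ?_, ?_, ?_, ?_⟩
          · simp only [pvScanA]
            rw [hgv, if_pos h0, hset, if_neg htest, haddod]
            rw [hsome]
            simp
          · intro x hx0 hx1 hx
            have hxne : x ≠ pvNorm n v := fun h => by rw [h] at hx; exact hx h0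
            rw [hmono'' x hx0 hx1 (by rw [hmono' x hx0 hx1 hxne]; exact hx), hmono' x hx0 hx1 hxne]
          · intro x hx0 hx1 hx0' hxne
            rcases eq_or_ne x (pvNorm n v) with h | h
            · exact ⟨v, List.mem_cons_self .., h.symm⟩
            · have : pvGet c' x = 0 := by rw [hmono' x hx0 hx1 h]; exact hx0'
              obtain ⟨w, hw, hwx⟩ := hnew'' x hx0 hx1 this hxne
              exact ⟨w, List.mem_cons_of_mem _ hw, hwx⟩
          · simp only [List.length_cons]
            omega
          · intro w hw
            rcases List.mem_cons.mp hw with hw | hw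
            · subst hw
              refine ⟨hvR, ?_⟩
              rw [hmono'' _ hv0 hv1 (by rw [hgvc', hcu2]; omega), hgvc', hcu2]
              omega
            · exact henq'' w hw
          · intro w hw
            rcases List.mem_cons.mp hw with hw | hw
            · subst hw
              have h1 : pvGet color' (pvNorm n w) = 3 - cu := by
                rw [hmono'' _ hv0 hv1 (by rw [hgvc', hcu2]; omega), hgvc']
              rw [h1, hcu2]
              constructor <;> omega
            · have := hdone'' w hw
              rw [hguc'] at this
              exact this
    · -- coloured neighbour
      by_cases hconf : pvGet color (pvNorm n v) = pvGet color (pvNorm n u)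
      · -- conflict: A returns 0 — the graph is not bipartite
        left
        constructor
        · simp only [pvScanA]
          rw [hgv, if_neg h0, hgu, if_pos hconf]
        · obtain ⟨m, p, hwu, hminu, hvu⟩ := inv.canon _ hu0 hu1 hcu
          obtain ⟨m', p', hwv, hminv, hvv⟩ := inv.canon _ hv0 hv1 h0
          have hm : m = m' := by
            apply le_antisymm
            · exact hminu m' _ (pvW_trans (pvW_single hvadj) hwv)
            · exact hminv m _ (pvW_trans (pvW_single (pvAdjE_symm hvadj)) hwu)
          have hp : p = p' := by
            rw [hconf, hvu] at hvv
            cases p <;> cases p' <;> simp_all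
          intro hB
          have hclosed : pvW E m m true := by
            have h1 : pvW E m (pvNorm n u) p := pvW_symm hwu
            have h2 : pvW E (pvNorm n u) (pvNorm n v) true := pvW_single hvadj
            have h3 : pvW E (pvNorm n v) m' p' := hwv
            have := pvW_trans h1 (pvW_trans h2 h3)
            rw [← hm] at this
            rw [← hp] at this
            simpa [Bool.xor_comm] using this
          exact absurd (hB m true hclosed) (by simp)
      · -- already consistently coloured: skip
        have := ih color q ev od inv hcu hrest
        rcases this with ⟨hnone, hbip⟩ | ⟨color', enq, ev', od', hsome, inv'', hmono'', hnew'', hcount'', henq'', hdone''⟩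
        · left
          refine ⟨?_, hbip⟩
          simp only [pvScanA]
          rw [hgv, if_neg h0, hgu, if_neg hconf]
          exact hnone
        · right
          refine ⟨color', enq, ev', od', ?_, inv'', hmono'', hnew'', hcount'', henq'', ?_⟩
          · simp only [pvScanA]
            rw [hgv, if_neg h0, hgu, if_neg hconf]
            exact hsome
          · intro w hw
            rcases List.mem_cons.mp hw with hw | hw
            · subst hw
              rw [hmono'' _ hv0 hv1 h0]
              exact ⟨h0, hconf⟩
            · exact hdone'' w hw

theorem pv_bfsA_run (n : Int) (E : List (Int × Int)) (adj : List (List Int))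
    (ctx : PvACtx n E adj) :
    ∀ (fuel : Nat) (q color ev od : List Int),
    PvAInv n E color ev od → pvQR n color q → pvClosed n E color q →
    color.count 0 + q.length ≤ fuel →
    (pvBfsA adj fuel (color, q, ev, od) = none ∧ ¬ pvBip E) ∨
    (∃ color' ev' od', pvBfsA adj fuel (color, q, ev, od) = some (color', [], ev', od') ∧
      PvAInv n E color' ev' od' ∧
      (∀ v, 0 ≤ v → v < n → pvGet color v ≠ 0 → pvGet color' v = pvGet color v) ∧
      pvClosed n E color' []) := by
  have hnn : (0 : Int) ≤ n := by have := ctx.hn; omega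
  intro fuel
  induction fuel with
  | zero =>
    intro q color ev od inv hq hcl hm
    cases q with
    | nil => exact Or.inr ⟨color, ev, od, rfl, inv, fun _ _ _ _ => rfl, hcl⟩
    | cons u q' => simp at hm
  | succ f ih =>
    intro q color ev od inv hq hcl hm
    cases q with
    | nil => exact Or.inr ⟨color, ev, od, rfl, inv, fun _ _ _ _ => rfl, hcl⟩
    | cons u q' =>
      obtain ⟨huR, hucol⟩ := hq u (List.mem_cons_self ..)
      obtain ⟨hu0, hu1⟩ := pvNorm_canon n u huR hnn
      have hadjget : PySem.List.pyGetD adj u [] = PySem.List.pyGetD adj (pvNorm n u) [] :=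
        pv_get_norm n adj u [] ctx.hlen huR
      have hnb : ∀ w ∈ PySem.List.pyGetD adj u [],
          PySem.Raise.InRange n.toNat w ∧ pvAdjE E (pvNorm n u) (pvNorm n w) := by
        rw [hadjget]; exact ctx.mem1 _ hu0 hu1
      have hscan := pv_scanA_run n E adj ctx u huR (PySem.List.pyGetD adj u []) color q' ev od
        inv hucol hnb
      rcases hscan with ⟨hnone, hbip⟩ | ⟨color', enq, ev', od', hsome, inv', hmono, hnew, hcount, henq, hdone⟩
      · left
        constructor
        · simp only [pvBfsA]; rw [hnone]
        · exact hbip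
      · have hq' : pvQR n color' (q' ++ enq) := by
          intro w hw
          rcases List.mem_append.mp hw with hw | hw
          · obtain ⟨hwR, hwcol⟩ := hq w (List.mem_cons_of_mem _ hw)
            obtain ⟨hw0, hw1⟩ := pvNorm_canon n w hwR hnn
            exact ⟨hwR, by rw [hmono _ hw0 hw1 hwcol]; exact hwcol⟩
          · exact henq w hw
        have hcl' : pvClosed n E color' (q' ++ enq) := by
          intro v hv0 hv1 hvcol hvq x hadj
          by_cases hold : pvGet color v ≠ 0
          · rcases eq_or_ne v (pvNorm n u) with hveq | hvne
            · subst hveq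
              obtain ⟨w, hw, hwx⟩ := ctx.mem2 _ x hv0 hv1 hadj
              rw [← hadjget] at hw
              have := hdone w hw
              rw [hwx] at this
              rw [hmono _ hv0 hv1 hold]
              exact this
            · have hguard : ∀ w ∈ u :: q', pvNorm n w ≠ v := by
                intro w hw
                rcases List.mem_cons.mp hw with hw | hw
                · subst hw; exact fun h => hvne h.symm
                · exact hvq w (List.mem_append_left _ hw)
              have := hcl v hv0 hv1 hold hguard x hadj
              obtain ⟨_, hx0, hx1⟩ := pv_adjE_can2 ctx.hE hadj
              rw [hmono x hx0 hx1 this.1, hmono v hv0 hv1 hold]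
              exact this
          · push_neg at hold
            obtain ⟨w, hw, hwv⟩ := hnew v hv0 hv1 hold hvcol
            exact absurd hwv (hvq w (List.mem_append_right _ hw))
        have hm' : color'.count 0 + (q' ++ enq).length ≤ f := by
          simp only [List.length_append]
          simp only [List.length_cons] at hm
          omega
        have := ih (q' ++ enq) color' ev' od' inv' hq' hcl' hm'
        rcases this with ⟨hnone2, hbip2⟩ | ⟨c2, e2, o2, hsome2, inv2, hmono2, hcl2⟩
        · left
          constructor
          · simp only [pvBfsA]; rw [hsome]; exact hnone2
          · exact hbip2
        · right
          refine ⟨c2, e2, o2, ?_, inv2, ?_, hcl2⟩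
          · simp only [pvBfsA]; rw [hsome]; exact hsome2
          · intro v hv0 hv1 hv
            rw [hmono2 v hv0 hv1 (by rw [hmono v hv0 hv1 hv]; exact hv), hmono v hv0 hv1 hv]

theorem pv_outerA_run (n : Int) (E : List (Int × Int)) (adj : List (List Int))
    (ctx : PvACtx n E adj) :
    ∀ (K : Nat) (i : Int) (color ev od : List Int),
    0 ≤ i → (n - i).toNat = K →
    PvAInv n E color ev od →
    (∀ v, 0 ≤ v → v < i → pvGet color v ≠ 0) →
    pvClosed n E color [] →
    (pvOuterA adj (n.toNat + 1) (PySem.List.pyRange i n) (color, ev, od) = none ∧ ¬ pvBip E) ∨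
    (∃ color' ev' od',
      pvOuterA adj (n.toNat + 1) (PySem.List.pyRange i n) (color, ev, od) = some (color', ev', od') ∧
      PvAInv n E color' ev' od' ∧ pvClosed n E color' [] ∧
      (∀ v, 0 ≤ v → v < n → pvGet color' v ≠ 0)) := by
  have hnn : (0 : Int) ≤ n := by have := ctx.hn; omega
  intro K
  induction K with
  | zero =>
    intro i color ev od hi0 hK inv hlow hcl
    have hni : n ≤ i := by omega
    rw [PySem.List.pyRange_one_eq_nil hni]
    exact Or.inr ⟨color, ev, od, rfl, inv, hcl, fun v hv0 hv1 => hlow v hv0 (by omega)⟩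
  | succ K' ih =>
    intro i color ev od hi0 hK inv hlow hcl
    have hin : i < n := by omega
    rw [PySem.List.pyRange_one_cons hin]
    have hgeti : PySem.List.pyGetD color i 0 = pvGet color i := rfl
    by_cases h0 : pvGet color i = 0
    · -- seed a new component at i
      have hiR : PySem.Raise.InRange n.toNat i := by
        constructor <;> omega
      have hnormi : pvNorm n i = i := pvNorm_eq_self n i hi0
      set c1 := PySem.List.pySetD color i 1 with hc1d
      have hlen1 : (c1.length : Int) = n := by rw [hc1d, pv_len_set]; exact inv.len
      have hget1 : ∀ x, 0 ≤ x → x < n → pvGet c1 x = if x = i then 1 else pvGet color x := by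
        intro x hx0 hx1
        exact pv_get_set color i x 1 0 hi0 (by rw [inv.len]; omega) hx0 (by rw [inv.len]; omega)
      have hg1i : pvGet c1 i = 1 := by rw [hget1 i hi0 hin, if_pos rfl]
      have hmono1 : ∀ x, 0 ≤ x → x < n → x ≠ i → pvGet c1 x = pvGet color x := by
        intro x hx0 hx1 hx
        rw [hget1 x hx0 hx1, if_neg hx]
      -- i is the minimum of its component
      have hmin : ∀ u q, pvW E i u q → i ≤ u := by
        intro u q hw
        rcases pvW_can ctx.hE hw with h | ⟨hu0', hu1'⟩
        · omega
        · by_contra hlt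
          push_neg at hlt
          have hucol : pvGet color u ≠ 0 := hlow u hu0' hlt
          have hclS : ∀ x y, (0 ≤ x ∧ x < n ∧ pvGet color x ≠ 0) → pvAdjE E x y →
              (0 ≤ y ∧ y < n ∧ pvGet color y ≠ 0) := by
            intro x y ⟨hx0, hx1, hxc⟩ hadj
            obtain ⟨_, hy0, hy1⟩ := pv_adjE_can2 ctx.hE hadj
            exact ⟨hy0, hy1, (hcl x hx0 hx1 hxc (by simp) y hadj).1⟩
          have := pvW_closed (fun x => 0 ≤ x ∧ x < n ∧ pvGet color x ≠ 0)
            hclS (pvW_symm hw) ⟨hu0', hu1', hucol⟩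
          exact this.2.2 h0
      have hinv1 : PvAInv n E c1 ev (PySem.Set.add od i) := by
        have hiod : i ∉ od := by
          intro h
          have : pvGet color i = 1 := (inv.odM i hi0 hin).mp ⟨i, h, hnormi⟩
          omega
        have haddod : PySem.Set.add od i = od ++ [i] := by
          simp [PySem.Set.add, PySem.Set.contains, List.contains_eq_mem, hiod]
        rw [haddod]
        refine ⟨hlen1, ?_, ?_, inv.evR, ?_, ?_, ?_, inv.evN, ?_⟩
        · intro x hx0 hx1
          rcases eq_or_ne x i with h | h
          · subst h; rw [hg1i]; omega
          · rw [hmono1 x hx0 hx1 h]; exact inv.vals x hx0 hx1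
        · intro x hx0 hx1 hx
          rcases eq_or_ne x i with h | h
          · subst h
            exact ⟨x, false, pvW.refl x, hmin, by rw [hg1i]; simp⟩
          · rw [hmono1 x hx0 hx1 h] at hx ⊢
            exact inv.canon x hx0 hx1 hx
        · intro w hw
          rcases List.mem_append.mp hw with hw | hw
          · exact inv.odR w hw
          · rw [List.mem_singleton.mp hw]; exact hiR
        · intro x hx0 hx1
          rcases eq_or_ne x i with h | h
          · subst h
            rw [hg1i]
            constructor
            · rintro ⟨w, hw, hwx⟩
              have : pvGet color x = 2 := (inv.evM x hx0 hx1).mp ⟨w, hw, hwx⟩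
              omega
            · intro h'; omega
          · rw [hmono1 x hx0 hx1 h]; exact inv.evM x hx0 hx1
        · intro x hx0 hx1
          rcases eq_or_ne x i with h | h
          · subst h
            rw [hg1i]
            constructor
            · intro _; rfl
            · intro _; exact ⟨x, by simp, hnormi⟩
          · rw [hmono1 x hx0 hx1 h]
            constructor
            · rintro ⟨w, hw, hwx⟩
              rcases List.mem_append.mp hw with hw | hw
              · exact (inv.odM x hx0 hx1).mp ⟨w, hw, hwx⟩
              · rw [List.mem_singleton.mp hw] at hwx
                rw [hnormi] at hwx
                exact absurd hwx.symm h
            · intro h'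
              obtain ⟨w, hw, hwx⟩ := (inv.odM x hx0 hx1).mpr h'
              exact ⟨w, List.mem_append_left _ hw, hwx⟩
        · rw [List.map_append]
          simp only [List.map_cons, List.map_nil]
          apply List.Nodup.append inv.odN (List.nodup_singleton _)
          intro a ha hb
          simp only [List.mem_singleton] at hb
          subst hb
          rw [hnormi] at ha
          obtain ⟨w, hw, hwa⟩ := List.mem_map.mp ha
          have : pvGet color i = 1 := (inv.odM i hi0 hin).mp ⟨w, hw, hwa⟩
          omega
      have hq1 : pvQR n c1 [i] := by
        intro w hw
        rw [List.mem_singleton.mp hw]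
        exact ⟨hiR, by rw [hnormi, hg1i]; omega⟩
      have hcl1 : pvClosed n E c1 [i] := by
        intro v hv0 hv1 hvcol hvq x hadj
        have hvne : v ≠ i := by
          intro h
          exact hvq i (List.mem_singleton_self _) (by rw [hnormi, h])
        rw [hmono1 v hv0 hv1 hvne] at hvcol ⊢
        have := hcl v hv0 hv1 hvcol (by simp) x hadj
        obtain ⟨_, hx0, hx1⟩ := pv_adjE_can2 ctx.hE hadj
        have hxne : x ≠ i := by
          intro h
          rw [h] at this
          exact this.1 h0
        rw [hmono1 x hx0 hx1 hxne]
        exact this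
      have hm1 : c1.count 0 + ([i] : List Int).length ≤ n.toNat + 1 := by
        have := List.count_le_length (l := c1) (a := (0:Int))
        have hlc : c1.length = n.toNat := by
          have := hlen1; omega
        simp only [List.length_singleton]
        omega
      have hbfs := pv_bfsA_run n E adj ctx (n.toNat + 1) [i] c1 ev (PySem.Set.add od i)
        hinv1 hq1 hcl1 hm1
      rcases hbfs with ⟨hnone, hbip⟩ | ⟨c2, ev2, od2, hsome, inv2, hmono2, hcl2⟩
      · left
        constructor
        · simp only [pvOuterA]
          rw [hgeti, if_pos h0, ← hc1d, hnone]
        · exact hbip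
      · have hrec := ih (i + 1) c2 ev2 od2 (by omega) (by omega) inv2
          (by
            intro v hv0 hv1
            rcases eq_or_ne v i with h | h
            · subst h
              rw [hmono2 v hv0 hin (by rw [hg1i]; omega), hg1i]
              omega
            · have hvi : v < i := by omega
              have hvlt : v < n := by omega
              have hold : pvGet color v ≠ 0 := hlow v hv0 hvi
              rw [hmono2 v hv0 hvlt (by rw [hmono1 v hv0 hvlt h]; exact hold), hmono1 v hv0 hvlt h]
              exact hold)
          hcl2
        rcases hrec with ⟨hnone3, hbip3⟩ | ⟨c3, e3, o3, hsome3, inv3, hcl3, hall3⟩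
        · left
          constructor
          · simp only [pvOuterA]
            rw [hgeti, if_pos h0, ← hc1d, hsome]
            exact hnone3
          · exact hbip3
        · right
          refine ⟨c3, e3, o3, ?_, inv3, hcl3, hall3⟩
          simp only [pvOuterA]
          rw [hgeti, if_pos h0, ← hc1d, hsome]
          exact hsome3
    · -- i already coloured
      have hrec := ih (i + 1) color ev od (by omega) (by omega) inv
        (by
          intro v hv0 hv1
          rcases eq_or_ne v i with h | h
          · subst h; exact h0
          · exact hlow v hv0 (by omega))
        hcl
      rcases hrec with ⟨hnone3, hbip3⟩ | ⟨c3, e3, o3, hsome3, inv3, hcl3, hall3⟩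
      · left
        constructor
        · simp only [pvOuterA]
          rw [hgeti, if_neg h0]
          exact hnone3
        · exact hbip3
      · right
        refine ⟨c3, e3, o3, ?_, inv3, hcl3, hall3⟩
        simp only [pvOuterA]
        rw [hgeti, if_neg h0]
        exact hsome3

-- ---------- B-side: parity union-find ----------
def pvRt (par pr : List Int) (v : Int) : Int × Int := pvFindB par pr (v.toNat + 1) v 0

structure PvBInv (n : Int) (E : List (Int × Int)) (par pr : List Int) : Prop where
  lenP : (par.length : Int) = n
  lenQ : (pr.length : Int) = n
  parR : ∀ v, 0 ≤ v → v < n → 0 ≤ pvGet par v ∧ pvGet par v ≤ v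
  prR : ∀ v, 0 ≤ v → v < n → pvGet pr v = 0 ∨ pvGet pr v = 1
  rootQ : ∀ v, 0 ≤ v → v < n → pvGet par v = v → pvGet pr v = 0
  linkW : ∀ v, 0 ≤ v → v < n → pvW E v (pvGet par v) (decide (pvGet pr v = 1))
  connR : ∀ a b, pvAdjE E a b → (pvRt par pr a).1 = (pvRt par pr b).1
  propR : ∀ a b, pvAdjE E a b → (pvRt par pr a).2 ≠ (pvRt par pr b).2

theorem pv_mod2 (p q : Int) (hp : p = 0 ∨ p = 1) (hq : q = 0 ∨ q = 1) :
    PySem.Int.mod (p + q) 2 = if p = q then 0 else 1 := by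
  rcases hp with hp | hp <;> rcases hq with hq | hq <;> subst hp <;> subst hq <;> decide

theorem pvFindB_root (par pr : List Int) (fuel : Nat) (a p : Int)
    (h : pvGet par a = a) : pvFindB par pr (fuel + 1) a p = (a, p) := by
  have h' : PySem.List.pyGetD par a 0 = a := h
  simp [pvFindB, h']

theorem pvFindB_step (par pr : List Int) (fuel : Nat) (a p : Int)
    (h : pvGet par a ≠ a) :
    pvFindB par pr (fuel + 1) a p =
      pvFindB par pr fuel (pvGet par a)
        (PySem.Int.mod (p + pvGet pr a) 2) := by
  have h' : PySem.List.pyGetD par a 0 ≠ a := h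
  simp [pvFindB, h']
  rfl

theorem pv_findB_stable (n : Int) (par pr : List Int)
    (parR : ∀ v, 0 ≤ v → v < n → 0 ≤ pvGet par v ∧ pvGet par v ≤ v) :
    ∀ (M : Nat) (v : Int), 0 ≤ v → v < n → v.toNat ≤ M →
    ∀ (p : Int) (K K' : Nat), v.toNat < K → v.toNat < K' →
    pvFindB par pr K v p = pvFindB par pr K' v p := by
  intro M
  induction M with
  | zero =>
    intro v hv0 hv1 hvM p K K' hK hK'
    have hv : v = 0 := by omega
    have hroot : pvGet par v = v := by
      have := parR v hv0 hv1; omega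
    obtain ⟨K1, rfl⟩ : ∃ K1, K = K1 + 1 := ⟨K - 1, by omega⟩
    obtain ⟨K2, rfl⟩ : ∃ K2, K' = K2 + 1 := ⟨K' - 1, by omega⟩
    rw [pvFindB_root par pr K1 v p hroot, pvFindB_root par pr K2 v p hroot]
  | succ M ih =>
    intro v hv0 hv1 hvM p K K' hK hK'
    obtain ⟨K1, rfl⟩ : ∃ K1, K = K1 + 1 := ⟨K - 1, by omega⟩
    obtain ⟨K2, rfl⟩ : ∃ K2, K' = K2 + 1 := ⟨K' - 1, by omega⟩
    by_cases hroot : pvGet par v = v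
    · rw [pvFindB_root par pr K1 v p hroot, pvFindB_root par pr K2 v p hroot]
    · have hlt : pvGet par v < v := by
        have := parR v hv0 hv1
        rcases lt_or_eq_of_le this.2 with h | h
        · exact h
        · exact absurd h hroot
      have h0 : 0 ≤ pvGet par v := (parR v hv0 hv1).1
      rw [pvFindB_step par pr K1 v p hroot, pvFindB_step par pr K2 v p hroot]
      exact ih (pvGet par v) h0 (by omega) (by omega) _ K1 K2 (by omega) (by omega)

theorem pv_findB_spec (n : Int) (E : List (Int × Int)) (par pr : List Int)
    (parR : ∀ v, 0 ≤ v → v < n → 0 ≤ pvGet par v ∧ pvGet par v ≤ v)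
    (prR : ∀ v, 0 ≤ v → v < n → pvGet pr v = 0 ∨ pvGet pr v = 1)
    (linkW : ∀ v, 0 ≤ v → v < n → pvW E v (pvGet par v) (decide (pvGet pr v = 1))) :
    ∀ (M : Nat) (v : Int), 0 ≤ v → v < n → v.toNat ≤ M →
    ∀ (p : Int), (p = 0 ∨ p = 1) → ∀ (K : Nat), v.toNat < K →
    ∃ r b, pvFindB par pr K v p = (r, PySem.Int.mod (p + (if b then 1 else 0)) 2) ∧
      0 ≤ r ∧ r ≤ v ∧ pvGet par r = r ∧ pvW E v r b := by
  intro M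
  induction M with
  | zero =>
    intro v hv0 hv1 hvM p hp K hK
    have hroot : pvGet par v = v := by have := parR v hv0 hv1; omega
    obtain ⟨K1, rfl⟩ : ∃ K1, K = K1 + 1 := ⟨K - 1, by omega⟩
    refine ⟨v, false, ?_, hv0, le_refl v, hroot, pvW.refl v⟩
    rw [pvFindB_root par pr K1 v p hroot]
    rcases hp with hp | hp <;> subst hp <;> norm_num <;> decide
  | succ M ih =>
    intro v hv0 hv1 hvM p hp K hK
    obtain ⟨K1, rfl⟩ : ∃ K1, K = K1 + 1 := ⟨K - 1, by omega⟩
    by_cases hroot : pvGet par v = v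
    · refine ⟨v, false, ?_, hv0, le_refl v, hroot, pvW.refl v⟩
      rw [pvFindB_root par pr K1 v p hroot]
      rcases hp with hp | hp <;> subst hp <;> norm_num <;> decide
    · have hlt : pvGet par v < v := by
        have := parR v hv0 hv1
        rcases lt_or_eq_of_le this.2 with h | h
        · exact h
        · exact absurd h hroot
      have h0 : 0 ≤ pvGet par v := (parR v hv0 hv1).1
      have hq := prR v hv0 hv1
      have hp' : PySem.Int.mod (p + pvGet pr v) 2 = 0 ∨ PySem.Int.mod (p + pvGet pr v) 2 = 1 := by
        rw [pv_mod2 p (pvGet pr v) hp hq]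
        split_ifs <;> simp
      obtain ⟨r, b', hfind, hr0, hrle, hrroot, hrw⟩ :=
        ih (pvGet par v) h0 (by omega) (by omega) _ hp' K1 (by omega)
      refine ⟨r, (decide (pvGet pr v = 1)) ^^ b', ?_, hr0, by omega, hrroot, ?_⟩
      · rw [pvFindB_step par pr K1 v p hroot]
        rw [hfind]
        congr 1
        rcases hp with hp | hp <;> rcases hq with hq | hq <;> subst hp <;> rw [hq] <;>
          cases b' <;> simp <;> decide
      · exact pvW_trans (linkW v hv0 hv1) hrw

theorem pv_rt_spec (n : Int) (E : List (Int × Int)) (par pr : List Int)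
    (parR : ∀ v, 0 ≤ v → v < n → 0 ≤ pvGet par v ∧ pvGet par v ≤ v)
    (prR : ∀ v, 0 ≤ v → v < n → pvGet pr v = 0 ∨ pvGet pr v = 1)
    (linkW : ∀ v, 0 ≤ v → v < n → pvW E v (pvGet par v) (decide (pvGet pr v = 1)))
    (v : Int) (hv0 : 0 ≤ v) (hv1 : v < n) :
    ∃ r b, pvRt par pr v = (r, if b then 1 else 0) ∧
      0 ≤ r ∧ r ≤ v ∧ pvGet par r = r ∧ pvW E v r b := by
  obtain ⟨r, b, hfind, h1, h2, h3, h4⟩ :=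
    pv_findB_spec n E par pr parR prR linkW v.toNat v hv0 hv1 (le_refl _) 0 (Or.inl rfl)
      (v.toNat + 1) (by omega)
  refine ⟨r, b, ?_, h1, h2, h3, h4⟩
  rw [pvRt, hfind]
  cases b <;> norm_num

theorem pv_find_union (n : Int) (par pr : List Int)
    (hlenP : (par.length : Int) = n) (hlenQ : (pr.length : Int) = n)
    (parR : ∀ v, 0 ≤ v → v < n → 0 ≤ pvGet par v ∧ pvGet par v ≤ v)
    (rhi rlo lp : Int) (h0lo : 0 ≤ rlo) (hlohi : rlo < rhi) (hhi : rhi < n)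
    (hroot : pvGet par rhi = rhi) (hrootlo : pvGet par rlo = rlo) :
    ∀ (K : Nat) (v : Int), 0 ≤ v → v < n → v.toNat < K → ∀ (p : Int),
    pvFindB (PySem.List.pySetD par rhi rlo) (PySem.List.pySetD pr rhi lp) K v p =
      (if (pvFindB par pr K v p).1 = rhi
        then (rlo, PySem.Int.mod ((pvFindB par pr K v p).2 + lp) 2)
        else pvFindB par pr K v p) := by
  have hgP : ∀ x, 0 ≤ x → x < n →
      pvGet (PySem.List.pySetD par rhi rlo) x = if x = rhi then rlo else pvGet par x := by
    intro x hx0 hx1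
    exact pv_get_set par rhi x rlo 0 (by omega) (by omega) hx0 (by omega)
  have hgQ : ∀ x, 0 ≤ x → x < n →
      pvGet (PySem.List.pySetD pr rhi lp) x = if x = rhi then lp else pvGet pr x := by
    intro x hx0 hx1
    exact pv_get_set pr rhi x lp 0 (by omega) (by omega) hx0 (by omega)
  intro K
  induction K with
  | zero => intro v _ _ h; omega
  | succ K ih =>
    intro v hv0 hv1 hK p
    by_cases hvroot : pvGet par v = v
    · rw [pvFindB_root par pr K v p hvroot]
      rcases eq_or_ne v rhi with hveq | hvne
      · have hstep : pvGet (PySem.List.pySetD par rhi rlo) v ≠ v := by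
          rw [hveq, hgP rhi (by omega) hhi, if_pos rfl]; omega
        rw [pvFindB_step _ _ K v p hstep]
        rw [hveq, hgP rhi (by omega) hhi, if_pos rfl, hgQ rhi (by omega) hhi, if_pos rfl]
        obtain ⟨K1, rfl⟩ : ∃ K1, K = K1 + 1 := ⟨K - 1, by omega⟩
        have hrootlo' : pvGet (PySem.List.pySetD par rhi rlo) rlo = rlo := by
          rw [hgP rlo h0lo (by omega), if_neg (by omega)]; exact hrootlo
        rw [pvFindB_root _ _ K1 rlo _ hrootlo']
        simp [hveq]
      · simp only [if_neg hvne]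
        have hstep : pvGet (PySem.List.pySetD par rhi rlo) v = v := by
          rw [hgP v hv0 hv1, if_neg hvne]; exact hvroot
        rw [pvFindB_root _ _ K v p hstep]
    · have hvne : v ≠ rhi := by
        intro h; rw [h] at hvroot; exact hvroot hroot
      have hlt : pvGet par v < v := by
        have := parR v hv0 hv1
        rcases lt_or_eq_of_le this.2 with h | h
        · exact h
        · exact absurd h hvroot
      have h0 : 0 ≤ pvGet par v := (parR v hv0 hv1).1
      have hstep : pvGet (PySem.List.pySetD par rhi rlo) v ≠ v := by
        rw [hgP v hv0 hv1, if_neg hvne]; exact hvroot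
      rw [pvFindB_step _ _ K v p hstep, pvFindB_step par pr K v p hvroot]
      rw [hgP v hv0 hv1, if_neg hvne, hgQ v hv0 hv1, if_neg hvne]
      exact ih (pvGet par v) h0 (by omega) (by omega) _

-- how pvRt transforms under a union
theorem pv_rt_union (n : Int) (par pr : List Int)
    (hlenP : (par.length : Int) = n) (hlenQ : (pr.length : Int) = n)
    (parR : ∀ v, 0 ≤ v → v < n → 0 ≤ pvGet par v ∧ pvGet par v ≤ v)
    (rhi rlo lp : Int) (h0lo : 0 ≤ rlo) (hlohi : rlo < rhi) (hhi : rhi < n)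
    (hroot : pvGet par rhi = rhi) (hrootlo : pvGet par rlo = rlo)
    (v : Int) (hv0 : 0 ≤ v) (hv1 : v < n) :
    pvRt (PySem.List.pySetD par rhi rlo) (PySem.List.pySetD pr rhi lp) v =
      (if (pvRt par pr v).1 = rhi
        then (rlo, PySem.Int.mod ((pvRt par pr v).2 + lp) 2)
        else pvRt par pr v) :=
  pv_find_union n par pr hlenP hlenQ parR rhi rlo lp h0lo hlohi hhi hroot hrootlo
    (v.toNat + 1) v hv0 hv1 (by omega) 0

theorem pv_find_raw (n : Int) (par pr : List Int)
    (hlenP : (par.length : Int) = n) (hlenQ : (pr.length : Int) = n)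
    (parR : ∀ v, 0 ≤ v → v < n → 0 ≤ pvGet par v ∧ pvGet par v ≤ v)
    (rootQ : ∀ v, 0 ≤ v → v < n → pvGet par v = v → pvGet pr v = 0)
    (hn : 1 ≤ n) (a : Int) (ha : PySem.Raise.InRange n.toNat a) :
    pvFindB par pr (n.toNat + 2) a 0 = pvRt par pr (pvNorm n a) := by
  have hnn : (0:Int) ≤ n := by omega
  obtain ⟨hna0, hna1⟩ := pvNorm_canon n a ha hnn
  by_cases h0 : 0 ≤ a
  · rw [pvNorm_eq_self n a h0]
    rw [pvNorm_eq_self n a h0] at hna1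
    exact pv_findB_stable n par pr parR a.toNat a h0 hna1 (le_refl _) 0 (n.toNat + 2)
      (a.toNat + 1) (by omega) (by omega)
  · push_neg at h0
    have hnorm : pvNorm n a = a + n := by unfold pvNorm; rw [if_pos h0]
    have hga : PySem.List.pyGetD par a 0 = pvGet par (pvNorm n a) := by
      unfold pvGet
      rw [pv_get_neg par a 0 (by rw [hlenP]; have := ha.1; have hcast : ((n.toNat:Int)) = n := Int.toNat_of_nonneg hnn; omega) h0, hlenP, hnorm]
    have hqa : PySem.List.pyGetD pr a 0 = pvGet pr (pvNorm n a) := by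
      unfold pvGet
      rw [pv_get_neg pr a 0 (by rw [hlenQ]; have := ha.1; have hcast : ((n.toNat:Int)) = n := Int.toNat_of_nonneg hnn; omega) h0, hlenQ, hnorm]
    have hstep : pvGet par a ≠ a := by
      unfold pvGet
      rw [hga]
      have := (parR _ hna0 hna1).1
      omega
    rw [show n.toNat + 2 = (n.toNat + 1) + 1 from rfl]
    rw [pvFindB_step par pr (n.toNat + 1) a 0 hstep]
    have hrw : pvGet par a = pvGet par (pvNorm n a) := hga
    have hrq : pvGet pr a = pvGet pr (pvNorm n a) := hqa
    rw [hrw, hrq]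
    by_cases hroot : pvGet par (pvNorm n a) = pvNorm n a
    · have hq0 : pvGet pr (pvNorm n a) = 0 := rootQ _ hna0 hna1 hroot
      rw [hq0, hroot]
      have : PySem.Int.mod (0 + 0) 2 = 0 := by decide
      rw [this]
      exact pv_findB_stable n par pr parR (pvNorm n a).toNat (pvNorm n a) hna0 hna1
        (le_refl _) 0 (n.toNat + 1) ((pvNorm n a).toNat + 1) (by omega) (by omega)
    · have hlt : pvGet par (pvNorm n a) < pvNorm n a := by
        have := parR _ hna0 hna1
        rcases lt_or_eq_of_le this.2 with h | h
        · exact h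
        · exact absurd h hroot
      have h0' : 0 ≤ pvGet par (pvNorm n a) := (parR _ hna0 hna1).1
      rw [pvRt]
      obtain ⟨K1, hK1⟩ : ∃ K1, (pvNorm n a).toNat + 1 = K1 + 1 := ⟨(pvNorm n a).toNat, rfl⟩
      rw [hK1, pvFindB_step par pr K1 (pvNorm n a) 0 hroot]
      have hK1' : K1 = (pvNorm n a).toNat := by omega
      exact pv_findB_stable n par pr parR (pvGet par (pvNorm n a)).toNat _ h0' (by omega)
        (le_refl _) _ (n.toNat + 1) K1 (by omega) (by omega)

theorem pv_adjE_append_one {E : List (Int × Int)} {na nb x y : Int} :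
    pvAdjE (E ++ [(na, nb)]) x y ↔ pvAdjE E x y ∨ (x = na ∧ y = nb) ∨ (x = nb ∧ y = na) := by
  unfold pvAdjE
  simp [List.mem_append, Prod.ext_iff]
  tauto

theorem pv_fold_none (fuel : Nat) :
    ∀ (l : List (List Int)),
    l.foldl (fun o e => o.bind (fun st => pvStepB fuel st e)) none = none := by
  intro l
  induction l with
  | nil => rfl
  | cons e rest ih => simpa [List.foldl_cons] using ih

theorem pv_union_inv (n : Int) (E E' : List (Int × Int)) (par pr : List Int) (hn : 1 ≤ n)
    (inv : PvBInv n E par pr)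
    (hsub : ∀ x ∈ E, x ∈ E')
    (hE'c : ∀ x ∈ E', (0 ≤ x.1 ∧ x.1 < n) ∧ (0 ≤ x.2 ∧ x.2 < n))
    (vlo vhi rlo rhi plo phi : Int) (blo bhi : Bool)
    (hvlo0 : 0 ≤ vlo) (hvlo1 : vlo < n) (hvhi0 : 0 ≤ vhi) (hvhi1 : vhi < n)
    (hrtlo : pvRt par pr vlo = (rlo, plo)) (hrthi : pvRt par pr vhi = (rhi, phi))
    (hplo : plo = if blo then 1 else 0) (hphi : phi = if bhi then 1 else 0)
    (hwlo : pvW E vlo rlo blo) (hwhi : pvW E vhi rhi bhi)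
    (hrlo0 : 0 ≤ rlo) (hrloroot : pvGet par rlo = rlo) (hrhiroot : pvGet par rhi = rhi)
    (hlohi : rlo < rhi) (hrhin : rhi < n)
    (hadj' : pvAdjE E' vlo vhi)
    (hdec : ∀ x y, pvAdjE E' x y → pvAdjE E x y ∨ (x = vlo ∧ y = vhi) ∨ (x = vhi ∧ y = vlo)) :
    PvBInv n E' (PySem.List.pySetD par rhi rlo)
      (PySem.List.pySetD pr rhi (PySem.Int.mod (plo + phi + 1) 2)) := by
  set lp := PySem.Int.mod (plo + phi + 1) 2 with hlpd
  have hlp01 : lp = 0 ∨ lp = 1 := by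
    rw [hlpd]; subst hplo; subst hphi; cases blo <;> cases bhi <;> decide
  have hgP : ∀ x, 0 ≤ x → x < n →
      pvGet (PySem.List.pySetD par rhi rlo) x = if x = rhi then rlo else pvGet par x := by
    intro x hx0 hx1
    exact pv_get_set par rhi x rlo 0 (by omega) (by rw [inv.lenP]; omega) hx0 (by rw [inv.lenP]; omega)
  have hgQ : ∀ x, 0 ≤ x → x < n →
      pvGet (PySem.List.pySetD pr rhi lp) x = if x = rhi then lp else pvGet pr x := by
    intro x hx0 hx1
    exact pv_get_set pr rhi x lp 0 (by omega) (by rw [inv.lenQ]; omega) hx0 (by rw [inv.lenQ]; omega)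
  have hrt' : ∀ v, 0 ≤ v → v < n →
      pvRt (PySem.List.pySetD par rhi rlo) (PySem.List.pySetD pr rhi lp) v =
        (if (pvRt par pr v).1 = rhi
          then (rlo, PySem.Int.mod ((pvRt par pr v).2 + lp) 2)
          else pvRt par pr v) := by
    intro v hv0 hv1
    exact pv_rt_union n par pr inv.lenP inv.lenQ inv.parR rhi rlo lp hrlo0 hlohi hrhin
      hrhiroot hrloroot v hv0 hv1
  have hrtq : ∀ a, 0 ≤ a → a < n → ∃ b : Bool, (pvRt par pr a).2 = if b then 1 else 0 := by
    intro a ha0 ha1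
    obtain ⟨r, b, hr, _⟩ := pv_rt_spec n E par pr inv.parR inv.prR inv.linkW a ha0 ha1
    exact ⟨b, by rw [hr]⟩

  refine ⟨by rw [pv_len_set]; exact inv.lenP, by rw [pv_len_set]; exact inv.lenQ, ?_, ?_, ?_, ?_, ?_, ?_⟩
  · intro x hx0 hx1
    rw [hgP x hx0 hx1]
    split_ifs with h
    · omega
    · exact inv.parR x hx0 hx1
  · intro x hx0 hx1
    rw [hgQ x hx0 hx1]
    split_ifs with h
    · exact hlp01
    · exact inv.prR x hx0 hx1
  · intro x hx0 hx1 hroot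
    rw [hgP x hx0 hx1] at hroot
    split_ifs at hroot with h
    · omega
    · rw [hgQ x hx0 hx1, if_neg h]
      exact inv.rootQ x hx0 hx1 hroot
  · intro x hx0 hx1
    rcases eq_or_ne x rhi with h | h
    · subst h
      rw [hgP _ hx0 hx1, if_pos rfl, hgQ _ hx0 hx1, if_pos rfl]
      have hw : pvW E' x rlo (bhi ^^ (true ^^ blo)) := by
        refine pvW_trans (pvW_symm (pvW_mono hsub ?_)) (pvW_trans (pvW_single (pvAdjE_symm hadj')) (pvW_mono hsub hwlo))
        exact hwhi
      have hpar : (decide (lp = 1)) = (bhi ^^ (true ^^ blo)) := by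
        rw [hlpd]; subst hplo; subst hphi; cases blo <;> cases bhi <;> decide
      rw [hpar]
      exact hw
    · rw [hgP _ hx0 hx1, if_neg h, hgQ _ hx0 hx1, if_neg h]
      exact pvW_mono hsub (inv.linkW x hx0 hx1)
  · intro a b hab
    obtain ⟨⟨ha0, ha1⟩, hb0, hb1⟩ := pv_adjE_can2 hE'c hab
    rw [hrt' a ha0 ha1, hrt' b hb0 hb1]
    rcases hdec a b hab with hold | ⟨rfl, rfl⟩ | ⟨rfl, rfl⟩
    · have hconn := inv.connR a b hold
      split_ifs with h1 h2 h2
      · rfl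
      · rw [hconn] at h1; exact absurd h1 h2
      · rw [hconn] at h1; exact absurd h2 h1
      · exact hconn
    · rw [hrtlo, hrthi]
      rw [if_neg (by simp; omega), if_pos (by simp)]
    · rw [hrtlo, hrthi]
      rw [if_pos (by simp), if_neg (by simp; omega)]
  · intro a b hab
    obtain ⟨⟨ha0, ha1⟩, hb0, hb1⟩ := pv_adjE_can2 hE'c hab
    rw [hrt' a ha0 ha1, hrt' b hb0 hb1]
    rcases hdec a b hab with hold | ⟨rfl, rfl⟩ | ⟨rfl, rfl⟩
    · have hconn := inv.connR a b hold
      have hprop := inv.propR a b hold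
      obtain ⟨ba, hba⟩ := hrtq a ha0 ha1
      obtain ⟨bb, hbb⟩ := hrtq b hb0 hb1
      split_ifs with h1 h2 h2
      · simp only []
        rw [hba, hbb]
        rw [hba, hbb] at hprop
        cases ba <;> cases bb
        · simp at hprop
        · rcases hlp01 with hlp | hlp <;> rw [hlp] <;> decide
        · rcases hlp01 with hlp | hlp <;> rw [hlp] <;> decide
        · simp at hprop
      · rw [hconn] at h1; exact absurd h1 h2
      · rw [hconn] at h1; exact absurd h2 h1
      · exact hprop
    · rw [hrtlo, hrthi]
      rw [if_neg (by simp; omega), if_pos (by simp)]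
      simp only []
      rw [hlpd]; subst hplo; subst hphi; cases blo <;> cases bhi <;> decide
    · rw [hrtlo, hrthi]
      rw [if_pos (by simp), if_neg (by simp; omega)]
      simp only []
      rw [hlpd]; subst hplo; subst hphi; cases blo <;> cases bhi <;> decide

theorem pvEV_can (n : Int) (hn : 1 ≤ n) (em : List (List Int))
    (hr : ∀ e ∈ em, PySem.Raise.InRange n.toNat (pvE0 e) ∧ PySem.Raise.InRange n.toNat (pvE1 e)) :
    ∀ x ∈ pvEV n em, (0 ≤ x.1 ∧ x.1 < n) ∧ (0 ≤ x.2 ∧ x.2 < n) := by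
  intro x hx
  obtain ⟨e, he, rfl⟩ := List.mem_map.mp hx
  exact ⟨pvNorm_canon n _ (hr e he).1 (by omega), pvNorm_canon n _ (hr e he).2 (by omega)⟩

theorem pv_stepB_one (n : Int) (hn : 1 ≤ n) (E : List (Int × Int)) (par pr : List Int)
    (inv : PvBInv n E par pr)
    (hEc : ∀ x ∈ E, (0 ≤ x.1 ∧ x.1 < n) ∧ (0 ≤ x.2 ∧ x.2 < n))
    (e : List Int) (ha : PySem.Raise.InRange n.toNat (pvE0 e))
    (hb : PySem.Raise.InRange n.toNat (pvE1 e)) :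
    (pvStepB (n.toNat + 2) (par, pr) e = none ∧
      ¬ pvBip (E ++ [(pvNorm n (pvE0 e), pvNorm n (pvE1 e))])) ∨
    (∃ par' pr', pvStepB (n.toNat + 2) (par, pr) e = some (par', pr') ∧
      PvBInv n (E ++ [(pvNorm n (pvE0 e), pvNorm n (pvE1 e))]) par' pr') := by
  have hnn : (0:Int) ≤ n := by omega
  obtain ⟨hna0, hna1⟩ := pvNorm_canon n (pvE0 e) ha hnn
  obtain ⟨hnb0, hnb1⟩ := pvNorm_canon n (pvE1 e) hb hnn
  have hfa : pvFindB par pr (n.toNat + 2) (PySem.List.pyGetD e 0 0) 0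
      = pvRt par pr (pvNorm n (pvE0 e)) :=
    pv_find_raw n par pr inv.lenP inv.lenQ inv.parR inv.rootQ hn (pvE0 e) ha
  have hfb : pvFindB par pr (n.toNat + 2) (PySem.List.pyGetD e 1 0) 0
      = pvRt par pr (pvNorm n (pvE1 e)) :=
    pv_find_raw n par pr inv.lenP inv.lenQ inv.parR inv.rootQ hn (pvE1 e) hb
  obtain ⟨ra, ba, hrta, hra0, hrale, hraroot, hwa⟩ :=
    pv_rt_spec n E par pr inv.parR inv.prR inv.linkW (pvNorm n (pvE0 e)) hna0 hna1
  obtain ⟨rb, bb, hrtb, hrb0, hrble, hrbroot, hwb⟩ :=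
    pv_rt_spec n E par pr inv.parR inv.prR inv.linkW (pvNorm n (pvE1 e)) hnb0 hnb1
  set na := pvNorm n (pvE0 e)
  set nb := pvNorm n (pvE1 e)
  set E' := E ++ [(na, nb)] with hE'd
  have hsub : ∀ x ∈ E, x ∈ E' := fun x hx => List.mem_append_left _ hx
  have hE'c : ∀ x ∈ E', (0 ≤ x.1 ∧ x.1 < n) ∧ (0 ≤ x.2 ∧ x.2 < n) := by
    intro x hx
    rcases List.mem_append.mp hx with hx | hx
    · exact hEc x hx
    · rw [List.mem_singleton.mp hx]
      exact ⟨⟨hna0, hna1⟩, hnb0, hnb1⟩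
  have hadjnew : pvAdjE E' na nb := Or.inl (List.mem_append_right _ (List.mem_singleton_self _))
  have hdec : ∀ x y, pvAdjE E' x y → pvAdjE E x y ∨ (x = na ∧ y = nb) ∨ (x = nb ∧ y = na) :=
    fun x y h => pv_adjE_append_one.mp h
  have hstep : pvStepB (n.toNat + 2) (par, pr) e =
      (if ra = rb then
        (if (ra, if ba then (1:Int) else 0).2 = (rb, if bb then (1:Int) else 0).2 then none else some (par, pr))
      else if ra < rb then
        some (PySem.List.pySetD par rb ra,
              PySem.List.pySetD pr rb (PySem.Int.mod ((ra, if ba then (1:Int) else 0).2 + (rb, if bb then (1:Int) else 0).2 + 1) 2))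
      else
        some (PySem.List.pySetD par ra rb,
              PySem.List.pySetD pr ra (PySem.Int.mod ((ra, if ba then (1:Int) else 0).2 + (rb, if bb then (1:Int) else 0).2 + 1) 2))) := by
    simp only [pvStepB, hfa, hfb, hrta, hrtb]
  by_cases hr : ra = rb
  · by_cases hbab : ba = bb
    · -- conflict: odd cycle
      left
      constructor
      · rw [hstep, if_pos hr, if_pos (by rw [hbab])]
      · intro hB
        have w1 : pvW E' na ra ba := pvW_mono hsub hwa
        have w2 : pvW E' nb rb bb := pvW_mono hsub hwb
        have hcl : pvW E' ra ra (ba ^^ (true ^^ bb)) :=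
          pvW_trans (pvW_symm w1) (pvW_trans (pvW_single hadjnew) (by rw [hr]; exact w2))
        have : (ba ^^ (true ^^ bb)) = true := by subst hbab; cases ba <;> rfl
        rw [this] at hcl
        exact absurd (hB ra true hcl) (by simp)
    · -- same component, opposite sides: nothing to do
      right
      refine ⟨par, pr, ?_, ?_⟩
      · rw [hstep, if_pos hr, if_neg (by simp only []; cases ba <;> cases bb <;> simp_all)]
      · refine ⟨inv.lenP, inv.lenQ, inv.parR, inv.prR, inv.rootQ,
          fun v hv0 hv1 => pvW_mono hsub (inv.linkW v hv0 hv1), ?_, ?_⟩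
        · intro x y hxy
          rcases hdec x y hxy with hold | ⟨rfl, rfl⟩ | ⟨rfl, rfl⟩
          · exact inv.connR x y hold
          · rw [hrta, hrtb]; simpa using hr
          · rw [hrta, hrtb]; simpa using hr.symm
        · intro x y hxy
          rcases hdec x y hxy with hold | ⟨rfl, rfl⟩ | ⟨rfl, rfl⟩
          · exact inv.propR x y hold
          · rw [hrta, hrtb]; simp only []; cases ba <;> cases bb <;> simp_all
          · rw [hrta, hrtb]; simp only []; cases ba <;> cases bb <;> simp_all
  · rcases lt_or_gt_of_ne hr with hlt | hlt
    · -- union: rb's tree hangs below ra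
      right
      refine ⟨_, _, by rw [hstep, if_neg hr, if_pos hlt], ?_⟩
      have := pv_union_inv n E E' par pr hn inv hsub hE'c na nb ra rb
        (if ba then 1 else 0) (if bb then 1 else 0) ba bb hna0 hna1 hnb0 hnb1
        hrta hrtb rfl rfl hwa hwb hra0 hraroot hrbroot hlt
        (by omega) hadjnew hdec
      simpa using this
    · -- union: ra's tree hangs below rb
      right
      refine ⟨_, _, by rw [hstep, if_neg hr, if_neg (by omega)], ?_⟩
      have := pv_union_inv n E E' par pr hn inv hsub hE'c nb na rb ra
        (if bb then 1 else 0) (if ba then 1 else 0) bb ba hnb0 hnb1 hna0 hna1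
        hrtb hrta rfl rfl hwb hwa hrb0 hrbroot hraroot hlt
        (by omega) (pvAdjE_symm hadjnew)
        (fun x y h => by rcases hdec x y h with h | h | h
                         · exact Or.inl h
                         · exact Or.inr (Or.inr h)
                         · exact Or.inr (Or.inl h))
      have hcomm : PySem.Int.mod ((if bb then (1:Int) else 0) + (if ba then (1:Int) else 0) + 1) 2
          = PySem.Int.mod ((ra, if ba then (1:Int) else 0).2 + (rb, if bb then (1:Int) else 0).2 + 1) 2 := by
        simp only []
        ring_nf
      rw [hcomm] at this
      simpa using this

theorem pv_foldB (n : Int) (hn : 1 ≤ n) :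
    ∀ (rest done : List (List Int)) (par pr : List Int),
    (∀ e ∈ done ++ rest, PySem.Raise.InRange n.toNat (pvE0 e) ∧ PySem.Raise.InRange n.toNat (pvE1 e)) →
    PvBInv n (pvEV n done) par pr →
    ((rest.foldl (fun o e => o.bind (fun st => pvStepB (n.toNat + 2) st e)) (some (par, pr)) = none ∧
        ¬ pvBip (pvEV n (done ++ rest))) ∨
     (∃ par' pr',
        rest.foldl (fun o e => o.bind (fun st => pvStepB (n.toNat + 2) st e)) (some (par, pr)) = some (par', pr') ∧
        PvBInv n (pvEV n (done ++ rest)) par' pr')) := by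
  intro rest
  induction rest with
  | nil =>
    intro done par pr hr inv
    right
    exact ⟨par, pr, rfl, by simpa using inv⟩
  | cons e rest' ih =>
    intro done par pr hr inv
    have hEc : ∀ x ∈ pvEV n done, (0 ≤ x.1 ∧ x.1 < n) ∧ (0 ≤ x.2 ∧ x.2 < n) :=
      pvEV_can n hn done (fun e' he' => hr e' (List.mem_append_left _ he'))
    have he : PySem.Raise.InRange n.toNat (pvE0 e) ∧ PySem.Raise.InRange n.toNat (pvE1 e) :=
      hr e (by simp)
    have hone := pv_stepB_one n hn (pvEV n done) par pr inv hEc e he.1 he.2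
    have hEVsnoc : pvEV n done ++ [(pvNorm n (pvE0 e), pvNorm n (pvE1 e))] = pvEV n (done ++ [e]) := by
      rw [pvEV_append]; rfl
    rcases hone with ⟨hnone, hbip⟩ | ⟨par', pr', hsome, inv'⟩
    · left
      constructor
      · simp only [List.foldl_cons, Option.bind_some, hnone]
        exact pv_fold_none (n.toNat + 2) rest'
      · intro hB
        apply hbip
        intro v p hw
        apply hB v p
        apply pvW_mono ?_ hw
        intro x hx
        rw [hEVsnoc] at hx
        unfold pvEV at hx ⊢
        simp only [List.map_append] at hx ⊢
        rcases List.mem_append.mp hx with hx | hx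
        · exact List.mem_append_left _ hx
        · refine List.mem_append_right _ ?_
          simp at hx
          simp [hx]
    · have := ih (done ++ [e]) par' pr'
        (by intro e' he'; apply hr; simpa [List.mem_append] using (by simpa [List.mem_append] using he' : e' ∈ done ++ [e] ++ rest'))
        (by rw [← hEVsnoc]; exact inv')
      rcases this with ⟨hnone2, hbip2⟩ | ⟨p2, q2, hsome2, inv2⟩
      · left
        constructor
        · simp only [List.foldl_cons, Option.bind_some, hsome]
          exact hnone2
        · simpa using hbip2
      · right
        refine ⟨p2, q2, ?_, ?_⟩
        · simp only [List.foldl_cons, Option.bind_some, hsome]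
          exact hsome2
        · simpa using inv2

theorem pv_foldl_const (k : Int) : ∀ (l : List Int) (a : Int),
    List.foldl (fun _ _ => k) a l = if l.isEmpty then a else k := by
  intro l
  induction l with
  | nil => simp
  | cons x t ih => intro a; simp [ih]

theorem pv_rootW (n : Int) (E : List (Int × Int)) (par pr : List Int)
    (inv : PvBInv n E par pr) :
    ∀ {v u : Int} {p : Bool}, pvW E v u p → (pvRt par pr v).1 = (pvRt par pr u).1 := by
  intro v u p h
  induction h with
  | refl => rfl
  | step ha _ ih =>
    exact (inv.connR _ _ ha).trans ih

theorem pv_root_min (n : Int) (E : List (Int × Int)) (par pr : List Int)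
    (inv : PvBInv n E par pr)
    (hEc : ∀ x ∈ E, (0 ≤ x.1 ∧ x.1 < n) ∧ (0 ≤ x.2 ∧ x.2 < n))
    (v : Int) (hv0 : 0 ≤ v) (hv1 : v < n) :
    ∀ u (q : Bool), pvW E v u q → (pvRt par pr v).1 ≤ u := by
  intro u q h
  rcases pvW_can hEc h with rfl | ⟨hu0, hu1⟩
  · obtain ⟨r, b, hr, _, hle, _, _⟩ := pv_rt_spec n E par pr inv.parR inv.prR inv.linkW u hv0 hv1
    rw [hr]
    exact hle
  · rw [pv_rootW n E par pr inv h]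
    obtain ⟨r, b, hr, _, hle, _, _⟩ := pv_rt_spec n E par pr inv.parR inv.prR inv.linkW u hu0 hu1
    rw [hr]
    exact hle

-- under bipartiteness A's colour and B's find-parity agree
theorem pv_parity_glue (n : Int) (E : List (Int × Int))
    (hEc : ∀ x ∈ E, (0 ≤ x.1 ∧ x.1 < n) ∧ (0 ≤ x.2 ∧ x.2 < n))
    (hB : pvBip E) (color ev od par pr : List Int)
    (invA : PvAInv n E color ev od) (invB : PvBInv n E par pr)
    (v : Int) (hv0 : 0 ≤ v) (hv1 : v < n) (hcol : pvGet color v ≠ 0) :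
    (pvGet color v = 1 ↔ (pvRt par pr v).2 = 0) ∧ (pvGet color v = 2 ↔ (pvRt par pr v).2 ≠ 0) := by
  obtain ⟨m, p, hwm, hminm, hval⟩ := invA.canon v hv0 hv1 hcol
  obtain ⟨r, b, hrt, hr0, hrle, hrroot, hwr⟩ :=
    pv_rt_spec n E par pr invB.parR invB.prR invB.linkW v hv0 hv1
  have hminr := pv_root_min n E par pr invB hEc v hv0 hv1
  rw [hrt] at hminr
  have hmr : m = r := pv_min_eq hwm hminm hwr hminr
  subst hmr
  have hpb : p = b := pvW_unique hB hwm hwr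
  subst hpb
  rw [hval, hrt]
  cases p <;> simp

theorem pv_set_count (n : Int) (hn : 1 ≤ n) (s : List Int) (f : Int → Bool)
    (hR : ∀ w ∈ s, PySem.Raise.InRange n.toNat w)
    (hN : (s.map (pvNorm n)).Nodup)
    (hM : ∀ v, 0 ≤ v → v < n → ((∃ w ∈ s, pvNorm n w = v) ↔ f v = true)) :
    s.length = ((PySem.List.pyRange 0 n).filter f).length := by
  have hnn : (0:Int) ≤ n := by omega
  have hlen : s.length = (s.map (pvNorm n)).length := by simp
  rw [hlen]
  have hperm : (s.map (pvNorm n)).Perm ((PySem.List.pyRange 0 n).filter f) := by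
    rw [List.perm_ext_iff_of_nodup hN (List.Nodup.filter f (PySem.List.nodup_pyRange_one 0 n))]
    intro x
    constructor
    · intro hx
      obtain ⟨w, hw, rfl⟩ := List.mem_map.mp hx
      obtain ⟨h0, h1⟩ := pvNorm_canon n w (hR w hw) hnn
      rw [List.mem_filter]
      refine ⟨?_, (hM _ h0 h1).mp ⟨w, hw, rfl⟩⟩
      rw [PySem.List.mem_pyRange_one]
      exact ⟨h0, h1⟩
    · intro hx
      rw [List.mem_filter, PySem.List.mem_pyRange_one] at hx
      obtain ⟨⟨h0, h1⟩, hf⟩ := hx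
      obtain ⟨w, hw, hwx⟩ := (hM x h0 h1).mpr hf
      exact List.mem_map.mpr ⟨w, hw, hwx⟩
  exact hperm.length_eq

theorem pv_countB_spec (par pr : List Int) (F : Nat) :
    ∀ (vs : List Int), (∀ v ∈ vs, pvFindB par pr F v 0 = pvRt par pr v) →
    ∀ (x y : Int),
    pvCountB par pr F vs (x, y) =
      (x + ((vs.filter (fun v => !((pvRt par pr v).2 == 0))).length : Int),
       y + ((vs.filter (fun v => (pvRt par pr v).2 == 0)).length : Int)) := by
  intro vs
  induction vs with
  | nil => intro _ x y; simp [pvCountB]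
  | cons v rest ih =>
    intro hst x y
    have hv := hst v (List.mem_cons_self ..)
    have hrest := fun w hw => hst w (List.mem_cons_of_mem _ hw)
    by_cases h : (pvRt par pr v).2 = 0
    · have : pvCountB par pr F (v :: rest) (x, y) = pvCountB par pr F rest (x, y + 1) := by
        simp [pvCountB, hv, h]
      rw [this, ih hrest x (y + 1)]
      simp [List.filter_cons, h]
      omega
    · have : pvCountB par pr F (v :: rest) (x, y) = pvCountB par pr F rest (x + 1, y) := by
        simp only [pvCountB]
        rw [hv, if_neg h]
      rw [this, ih hrest (x + 1) y]
      simp [List.filter_cons, h]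
      omega

set_option maxHeartbeats 1600000 in
theorem poisonousGraph_spec : Claim_equal_poisonousGraph := by
  intro vertice edgeMat _ hpre
  unfold Spec_poisonousGraph
  obtain ⟨hv1, hrows⟩ := hpre
  set n := vertice + 1 with hnd
  have hn : 1 ≤ n := by omega
  have hnn : (0:Int) ≤ n := by omega
  have hcastn : ((n.toNat : Int)) = n := Int.toNat_of_nonneg hnn
  have hrange : ∀ e ∈ edgeMat,
      PySem.Raise.InRange n.toNat (pvE0 e) ∧ PySem.Raise.InRange n.toNat (pvE1 e) := by
    intro e he
    obtain ⟨_, ⟨h1, h2⟩, h3, h4⟩ := hrows e he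
    have he0 : pvE0 e = PySem.List.pyGetD e 0 0 := rfl
    have he1 : pvE1 e = PySem.List.pyGetD e 1 0 := rfl
    exact ⟨⟨by omega, by omega⟩, ⟨by omega, by omega⟩⟩
  set E := pvEV n edgeMat with hEd
  have hEc : ∀ x ∈ E, (0 ≤ x.1 ∧ x.1 < n) ∧ (0 ≤ x.2 ∧ x.2 < n) :=
    pvEV_can n hn edgeMat hrange
  simp only [poisonousGraph, poisonousGraph_alt]
  -- A's adjacency fold over indices becomes a fold over the rows
  have hAB := PySem.List.foldl_pyRange_pyGetD edgeMat ([] : List Int)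
      (fun adj e =>
        let a := PySem.List.pyGetD e 0 0
        let b := PySem.List.pyGetD e 1 0
        let adj1 := PySem.List.pySetD adj a (PySem.List.pyGetD adj a [] ++ [b])
        PySem.List.pySetD adj1 b (PySem.List.pyGetD adj1 b [] ++ [a]))
      ((PySem.List.pyRange 0 n).map (fun _ => ([] : List Int)))
      (a := 0) (le_refl 0)
  simp only [Int.toNat_zero, List.drop_zero] at hAB
  rw [hAB]
  have hfoldeq : edgeMat.foldl
      (fun adj e =>
        let a := PySem.List.pyGetD e 0 0
        let b := PySem.List.pyGetD e 1 0
        let adj1 := PySem.List.pySetD adj a (PySem.List.pyGetD adj a [] ++ [b])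
        PySem.List.pySetD adj1 b (PySem.List.pyGetD adj1 b [] ++ [a]))
      ((PySem.List.pyRange 0 n).map (fun _ => ([] : List Int)))
      = edgeMat.foldl pvAdjStep ((PySem.List.pyRange 0 n).map (fun _ => ([] : List Int))) := rfl
  rw [hfoldeq]
  set adj0 := (PySem.List.pyRange 0 n).map (fun _ => ([] : List Int)) with hadj0d
  have hlen0 : (adj0.length : Int) = n := by
    rw [hadj0d]
    simp [PySem.List.length_pyRange_one]
    omega
  have hbase : ∀ u, 0 ≤ u → u < n → ∀ w, w ∈ PySem.List.pyGetD adj0 u [] ↔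
      ∃ e ∈ ([] : List (List Int)),
        (pvNorm n (pvE0 e) = u ∧ pvE1 e = w) ∨ (pvNorm n (pvE1 e) = u ∧ pvE0 e = w) := by
    intro u h0 h1 w
    rw [hadj0d, PySem.List.pyGetD_map_pyRange_of_nonneg _ n u _ h0 h1]
    simp
  obtain ⟨hlenA, hmemA⟩ := pv_adj_build n hn edgeMat [] adj0 hrange hlen0 hbase
  simp only [List.nil_append] at hmemA
  set adjA := edgeMat.foldl pvAdjStep adj0 with hadjAd
  have ctx : PvACtx n E adjA := by
    refine ⟨hn, hEc, hlenA, ?_, ?_⟩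
    · intro u hu0 hu1 w hw
      obtain ⟨e, he, hc⟩ := (hmemA u hu0 hu1 w).mp hw
      rcases hc with ⟨h1, h2⟩ | ⟨h1, h2⟩
      · refine ⟨by rw [← h2]; exact (hrange e he).2, Or.inl ?_⟩
        rw [hEd]
        exact List.mem_map.mpr ⟨e, he, by rw [h1, h2]⟩
      · refine ⟨by rw [← h2]; exact (hrange e he).1, Or.inr ?_⟩
        rw [hEd]
        exact List.mem_map.mpr ⟨e, he, by rw [h1, h2]⟩
    · intro u v hu0 hu1 hadj
      rcases hadj with hmem | hmem
      · rw [hEd] at hmem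
        obtain ⟨e, he, heq⟩ := List.mem_map.mp hmem
        obtain ⟨hq1, hq2⟩ := Prod.mk.injEq .. ▸ heq
        refine ⟨pvE1 e, ?_, hq2⟩
        exact (hmemA u hu0 hu1 (pvE1 e)).mpr ⟨e, he, Or.inl ⟨hq1, rfl⟩⟩
      · rw [hEd] at hmem
        obtain ⟨e, he, heq⟩ := List.mem_map.mp hmem
        obtain ⟨hq1, hq2⟩ := Prod.mk.injEq .. ▸ heq
        refine ⟨pvE0 e, ?_, hq1⟩
        exact (hmemA u hu0 hu1 (pvE0 e)).mpr ⟨e, he, Or.inr ⟨hq2, rfl⟩⟩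
  -- initial A state
  rw [PySem.List.pyRepeat_singleton]
  set color0 := List.replicate n.toNat (0 : Int) with hcol0d
  have hg0 : ∀ v, 0 ≤ v → v < n → pvGet color0 v = 0 := by
    intro v hv0 hv1
    rw [hcol0d]
    unfold pvGet
    rw [pv_get_canon _ v 0 hv0 (by simp; omega)]
    simp
  have hlenc0 : (color0.length : Int) = n := by rw [hcol0d]; simp; omega
  have invA0 : PvAInv n E color0 [] [] := by
    refine ⟨hlenc0, fun v h0 h1 => Or.inl (hg0 v h0 h1),
      fun v h0 h1 hne => absurd (hg0 v h0 h1) hne,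
      by simp, by simp, ?_, ?_, by simp, by simp⟩
    · intro v h0 h1
      rw [hg0 v h0 h1]
      constructor
      · rintro ⟨w, hw, _⟩; cases hw
      · intro h; omega
    · intro v h0 h1
      rw [hg0 v h0 h1]
      constructor
      · rintro ⟨w, hw, _⟩; cases hw
      · intro h; omega
  have hcl0 : pvClosed n E color0 [] := by
    intro v h0 h1 hne
    exact absurd (hg0 v h0 h1) hne
  have houter := pv_outerA_run n E adjA ctx n.toNat 0 color0 [] [] (le_refl 0)
    (by omega) invA0 (by intro v h0 h1; omega) hcl0
  -- initial B state
  set par0 := PySem.List.pyRange 0 n with hpar0d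
  have hlenp0 : (par0.length : Int) = n := by
    rw [hpar0d]; simp [PySem.List.length_pyRange_one]; omega
  have hgp0 : ∀ v, 0 ≤ v → v < n → pvGet par0 v = v := by
    intro v hv0 hv1
    unfold pvGet
    rw [hpar0d]
    rw [pv_get_canon _ v 0 hv0 (by simp [PySem.List.length_pyRange_one]; omega)]
    rw [PySem.List.getElem_pyRange_one]
    omega
  have invB0 : PvBInv n (pvEV n []) par0 color0 := by
    refine ⟨hlenp0, hlenc0, ?_, ?_, ?_, ?_, ?_, ?_⟩
    · intro v h0 h1; rw [hgp0 v h0 h1]; omega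
    · intro v h0 h1; exact Or.inl (hg0 v h0 h1)
    · intro v h0 h1 _; exact hg0 v h0 h1
    · intro v h0 h1
      rw [hgp0 v h0 h1]
      have : decide (pvGet color0 v = 1) = false := by
        rw [hg0 v h0 h1]; decide
      rw [this]
      exact pvW.refl v
    · intro a b h
      have hEV0 : pvEV n ([] : List (List Int)) = [] := rfl
      rcases h with h | h <;> rw [hEV0] at h <;> cases h
    · intro a b h
      have hEV0 : pvEV n ([] : List (List Int)) = [] := rfl
      rcases h with h | h <;> rw [hEV0] at h <;> cases h
  have hfoldB := pv_foldB n hn edgeMat [] par0 color0 (by simpa using hrange) invB0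
  simp only [List.nil_append] at hfoldB
  rw [← hEd] at hfoldB
  -- properness helpers
  have hbipB : ∀ par' pr', PvBInv n E par' pr' → pvBip E := by
    intro par' pr' invB
    apply pvBip_of_proper (fun v => ((pvRt par' pr' v).2 == 1))
    intro u v hadj
    obtain ⟨⟨hu0, hu1⟩, hv0, hv1⟩ := pv_adjE_can2 hEc hadj
    have hprop := invB.propR u v hadj
    obtain ⟨ru, bu, hru, _⟩ := pv_rt_spec n E par' pr' invB.parR invB.prR invB.linkW u hu0 hu1
    obtain ⟨rv, bv, hrv, _⟩ := pv_rt_spec n E par' pr' invB.parR invB.prR invB.linkW v hv0 hv1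
    rw [hru, hrv] at hprop ⊢
    simp only [] at hprop ⊢
    cases bu <;> cases bv <;> simp_all
  have hbipA : ∀ color' ev' od', PvAInv n E color' ev' od' → pvClosed n E color' [] →
      (∀ v, 0 ≤ v → v < n → pvGet color' v ≠ 0) → pvBip E := by
    intro color' ev' od' invA hcl hall
    apply pvBip_of_proper (fun v => (pvGet color' v == 2))
    intro u v hadj
    obtain ⟨⟨hu0, hu1⟩, hv0, hv1⟩ := pv_adjE_can2 hEc hadj
    have hth := hcl u hu0 hu1 (hall u hu0 hu1) (by intro w hw; cases hw) v hadj
    rcases invA.vals u hu0 hu1 with h | h | h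
    · exact absurd h (hall u hu0 hu1)
    · rcases invA.vals v hv0 hv1 with h' | h' | h'
      · exact absurd h' hth.1
      · rw [h', h] at hth
        exact absurd rfl hth.2
      · show (pvGet color' u == 2) ≠ (pvGet color' v == 2)
        rw [h, h']
        decide
    · rcases invA.vals v hv0 hv1 with h' | h' | h'
      · exact absurd h' hth.1
      · show (pvGet color' u == 2) ≠ (pvGet color' v == 2)
        rw [h, h']
        decide
      · rw [h', h] at hth
        exact absurd rfl hth.2
  rcases houter with ⟨hnoneA, hbip⟩ | ⟨colorF, evF, odF, hsomeA, invAF, hclF, hallF⟩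
  · -- A found an odd cycle: both return 0
    rw [hnoneA]
    rcases hfoldB with ⟨hnoneB, _⟩ | ⟨parF, prF, hsomeB, invBF⟩
    · rw [hnoneB]
    · exact absurd (hbipB parF prF invBF) hbip
  · rw [hsomeA]
    have hbip : pvBip E := hbipA colorF evF odF invAF hclF hallF
    rcases hfoldB with ⟨hnoneB, hbipN⟩ | ⟨parF, prF, hsomeB, invBF⟩
    · exact absurd hbip hbipN
    · rw [hsomeB]
      dsimp only []
      -- both succeeded: the counts agree
      have hstable : ∀ v ∈ PySem.List.pyRange 0 n, pvFindB parF prF (n.toNat + 2) v 0 = pvRt parF prF v := by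
        intro v hv
        rw [PySem.List.mem_pyRange_one] at hv
        exact pv_findB_stable n parF prF invBF.parR v.toNat v hv.1 hv.2 (le_refl _) 0
          (n.toNat + 2) (v.toNat + 1) (by omega) (by omega)
      have hcount := pv_countB_spec parF prF (n.toNat + 2) (PySem.List.pyRange 0 n) hstable 0 0
      rw [hcount]
      dsimp only []
      have hglue := fun v hv0 hv1 => pv_parity_glue n E hEc hbip colorF evF odF parF prF
        invAF invBF v hv0 hv1 (hallF v hv0 hv1)
      have hx : (evF.length : Int) =
          (((PySem.List.pyRange 0 n).filter (fun v => !((pvRt parF prF v).2 == 0))).length : Int) := by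
        congr 1
        apply pv_set_count n hn evF _ invAF.evR invAF.evN
        intro v hv0 hv1
        rw [invAF.evM v hv0 hv1]
        have := (hglue v hv0 hv1).2
        constructor
        · intro h; simpa using this.mp h
        · intro h
          apply this.mpr
          simpa using h
      have hy : (odF.length : Int) =
          (((PySem.List.pyRange 0 n).filter (fun v => ((pvRt parF prF v).2 == 0))).length : Int) := by
        congr 1
        apply pv_set_count n hn odF _ invAF.odR invAF.odN
        intro v hv0 hv1
        rw [invAF.odM v hv0 hv1]
        have := (hglue v hv0 hv1).1
        constructor
        · intro h; simpa using this.mp h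
        · intro h
          apply this.mpr
          simpa using h
      have hlenev : PySem.Set.len evF = (evF.length : Int) := rfl
      have hlenod : PySem.Set.len odF = (odF.length : Int) := rfl
      rw [hlenev, hlenod, hx, hy]
      have hne : (PySem.List.pyRange 0 vertice).isEmpty = false := by
        rw [PySem.List.pyRange_one_cons (by omega : (0 : Int) < vertice)]
        rfl
      rw [pv_foldl_const, hne, if_neg (by simp)]
      simp only [zero_add]
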